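-- pv_equiv track=rewrite | github.com/UWCS/progcomps | 2223_t2/3/sols/sol.py | doomed_gambit
-- ===== SOURCE A (Python) =====
-- class Node:
--     def __init__(self, x, y) -> None:
--         self.x = x
--         self.y = y
--         self.hori = []
--         self.vert = []
--         self.diag = []
--         self.anti = []
--         self.mark = False
--
-- def doomed_gambit(coords: list[tuple[int, int]]) -> list[tuple[int, int]]:
--     nodes = [Node(x, y) for x, y in coords]
--     q = len(nodes)
--
--     # Horizontal
--     nodes = sorted(nodes, key=lambda n: (n.x, n.y))
--     for i in range(q):
--         if i != 0 and nodes[i].x == nodes[i-1].x: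
--             nodes[i].hori.append(nodes[i-1])
--         if i != q - 1 and nodes[i].x == nodes[i+1].x:
--             nodes[i].hori.append(nodes[i+1])
--
--     # Vertical
--     nodes = sorted(nodes, key=lambda n: (n.y, n.x))
--     for i in range(q):
--         if i != 0 and nodes[i].y == nodes[i-1].y:
--             nodes[i].vert.append(nodes[i-1])
--         if i != q - 1 and nodes[i].y == nodes[i+1].y:
--             nodes[i].vert.append(nodes[i+1])
--
--     # Diagonal
--     nodes = sorted(nodes, key=lambda n: (n.x + n.y, n.x))
--     for i in range(q):
--         if i != 0 and nodes[i].x + nodes[i].y == nodes[i-1].x + nodes[i-1].y: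
--             nodes[i].diag.append(nodes[i-1])
--         if i != q - 1 and nodes[i].x + nodes[i].y == nodes[i+1].x + nodes[i+1].y:
--             nodes[i].diag.append(nodes[i+1])
--
--
--     # Antidiagonal
--     nodes = sorted(nodes, key=lambda n: (n.y - n.x, n.x))
--     for i in range(q):
--         if i != 0 and nodes[i].y - nodes[i].x == nodes[i-1].y - nodes[i-1].x:
--             nodes[i].anti.append(nodes[i-1])
--         if i != q - 1 and nodes[i].y - nodes[i].x == nodes[i+1].y - nodes[i+1].x:
--             nodes[i].anti.append(nodes[i+1])
--
--     for node in nodes: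
--         if len(node.hori + node.vert + node.diag + node.anti) == 1:
--             node.mark = True
--
--     doomed = []
--     for node in nodes:
--         if len(node.hori) == 0 or len(node.hori) == 1 and node.hori[0].mark:
--             continue
--         if len(node.vert) == 0 or len(node.vert) == 1 and node.vert[0].mark:
--             continue
--         if len(node.diag) == 0 or len(node.diag) == 1 and node.diag[0].mark:
--             continue
--         if len(node.anti) == 0 or len(node.anti) == 1 and node.anti[0].mark:
--             continue
--         doomed.append(node)
--
--     return [(node.x, node.y) for node in doomed]
-- ===== SOURCE B (Python) =====
-- def doomed_gambit(coords: list[tuple[int, int]]) -> list[tuple[int, int]]: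
--     # Works on DISTINCT coordinates with multiplicities instead of per-instance
--     # neighbour lists.  A repeated coordinate always survives: every copy has,
--     # in each direction, at least one neighbour (another copy), and a copy's
--     # lone neighbour is then itself a repeated coordinate, hence never marked.
--     cnt = {}
--     for p in coords:
--         cnt[p] = cnt.get(p, 0) + 1
--
--     def steps(key, unkey):
--         # per line: the sorted distinct offsets; each coordinate's immediate
--         # smaller/larger line-mate (None at the ends of the line)
--         lines = {}
--         for p in cnt:
--             k, s = key(p[0], p[1])
--             lines.setdefault(k, []).append(s)
--         nbr = {}
--         for k, vals in lines.items():
--             vals.sort()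
--             m = len(vals)
--             for i in range(m):
--                 nbr[unkey(k, vals[i])] = (unkey(k, vals[i - 1]) if i > 0 else None,
--                                           unkey(k, vals[i + 1]) if i + 1 < m else None)
--         return nbr
--
--     hori = steps(lambda x, y: (x, y), lambda k, s: (k, s))
--     vert = steps(lambda x, y: (y, x), lambda k, s: (s, k))
--     diag = steps(lambda x, y: (x + y, x), lambda k, s: (s, k - s))
--     anti = steps(lambda x, y: (y - x, x), lambda k, s: (s, k + s))
--
--     def marked(p):
--         # p occurs once and has exactly one neighbour over all four directions
--         if cnt[p] > 1:
--             return False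
--         return sum((a is not None) + (b is not None)
--                    for a, b in (hori[p], vert[p], diag[p], anti[p])) == 1
--
--     def alive(nbr, p):
--         a, b = nbr[p]
--         if a is None and b is None:
--             return False
--         if b is None:
--             return not marked(a)
--         if a is None:
--             return not marked(b)
--         return True
--
--     out = sorted(coords, key=lambda p: (p[1] - p[0], p[0]))
--     return [p for p in out
--             if cnt[p] > 1 or (alive(hori, p) and alive(vert, p)
--                               and alive(diag, p) and alive(anti, p))]
-- ===== Notes on version B (the rewrite author's own statement) =====
-- stated objective: alternative
-- what changed: B abandons A's per-instance node objects and four chained global stable sorts: it dedupes the input into distinct coordinates with multiplicities, uses the closed rule that a repeated coordinate always survives (each copy has a neighbour in every direction, and a lone neighbour is then itself repeated, hence unmarked), computes for each direction a line-keyed map from each distinct coordinate to its immediate smaller/larger line-mates via sorted distinct offsets, and derives the mark as a pure predicate on coordinates instead of flags on mutated node objects.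
import Mathlib
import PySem

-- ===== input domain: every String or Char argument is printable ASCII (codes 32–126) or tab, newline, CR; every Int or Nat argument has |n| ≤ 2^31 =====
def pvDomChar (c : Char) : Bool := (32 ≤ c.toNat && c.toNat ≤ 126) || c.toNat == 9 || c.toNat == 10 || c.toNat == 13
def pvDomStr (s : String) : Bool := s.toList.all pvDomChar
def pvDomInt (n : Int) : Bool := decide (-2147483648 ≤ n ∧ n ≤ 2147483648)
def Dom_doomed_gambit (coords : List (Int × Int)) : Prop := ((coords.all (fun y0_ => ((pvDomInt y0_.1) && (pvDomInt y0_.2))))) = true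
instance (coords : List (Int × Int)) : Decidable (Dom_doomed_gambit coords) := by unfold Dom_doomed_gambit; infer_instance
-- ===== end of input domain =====

-- B drops A's node objects and four chained global stable sorts: it works on the
-- DISTINCT coordinates with multiplicities (a repeated coordinate always survives),
-- maps each distinct coordinate to its immediate smaller/larger line-mates per
-- direction, and derives the mark as a pure predicate on coordinates; same cost.

-- ===== PORT A =====
-- A node is identified by its ORIGINAL index into coords (Python's object identity);
-- node attributes .x/.y are read off coords.  Each node's direction list (hori/vert/
-- diag/anti) is assigned exactly once, during the loop iteration at the node's own
-- position t in the then-current sorted list, so the list written into node i is the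
-- body of that iteration read at t = idxOf i.
def pvNbrA (p : Nat → Int) (L : List Nat) (i : Nat) : List Nat :=
  let q := L.length
  let t := L.idxOf i
  (if t ≠ 0 ∧ p (L.getD t 0) = p (L.getD (t - 1) 0) then [L.getD (t - 1) 0] else []) ++
  (if t ≠ q - 1 ∧ p (L.getD t 0) = p (L.getD (t + 1) 0) then [L.getD (t + 1) 0] else [])

-- node.mark = (len(node.hori + node.vert + node.diag + node.anti) == 1), with each
-- direction list read off as pvNbrA over the four sorted orders
def pvMarkA (coords : List (Int × Int)) (L1 L2 L3 L4 : List Nat) (t : Nat) : Bool :=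
  (pvNbrA (fun i => (coords.getD i (0, 0)).1) L1 t ++
    (pvNbrA (fun i => (coords.getD i (0, 0)).2) L2 t ++
      (pvNbrA (fun i => (coords.getD i (0, 0)).1 + (coords.getD i (0, 0)).2) L3 t ++
        pvNbrA (fun i => (coords.getD i (0, 0)).2 - (coords.getD i (0, 0)).1) L4 t))).length == 1

-- one continue-guard of the doomed loop: empty, or a single marked neighbour
def pvSkipA (mark : Nat → Bool) (ds : List Nat) : Bool :=
  ds.length == 0 || (ds.length == 1 && mark (ds.headD 0))

def doomed_gambit (coords : List (Int × Int)) : List (Int × Int) :=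
  let q := coords.length
  let X : Nat → Int := fun i => (coords.getD i (0, 0)).1
  let Y : Nat → Int := fun i => (coords.getD i (0, 0)).2
  let nodes0 := List.range q
  -- Horizontal
  let nodes1 := PySem.List.sorted2 nodes0 X Y
  let hori : Nat → List Nat := fun i => pvNbrA X nodes1 i
  -- Vertical
  let nodes2 := PySem.List.sorted2 nodes1 Y X
  let vert : Nat → List Nat := fun i => pvNbrA Y nodes2 i
  -- Diagonal
  let nodes3 := PySem.List.sorted2 nodes2 (fun i => X i + Y i) X
  let diag : Nat → List Nat := fun i => pvNbrA (fun i => X i + Y i) nodes3 i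
  -- Antidiagonal
  let nodes4 := PySem.List.sorted2 nodes3 (fun i => Y i - X i) X
  let anti : Nat → List Nat := fun i => pvNbrA (fun i => Y i - X i) nodes4 i
  -- for node in nodes: node.mark = ...  (a per-node flag)
  let mark : Nat → Bool := pvMarkA coords nodes1 nodes2 nodes3 nodes4
  -- doomed loop over nodes (in antidiagonal order), with the four continue-guards
  let doomed := nodes4.filter (fun i =>
    !(pvSkipA mark (hori i)) && !(pvSkipA mark (vert i)) && !(pvSkipA mark (diag i)) && !(pvSkipA mark (anti i)))
  doomed.map (fun i => (X i, Y i))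

-- ===== PORT B =====
-- Source B's steps(key, unkey): lines.setdefault(k, []).append(s) is Dict.modify k [] (· ++ [s]);
-- vals.sort() is PySem.List.sorted vals id (no key); the enumerated write of each point's
-- (smaller, larger) line-mate pair is the inner fold over range m.
def pvSteps (cnt : PySem.Dict (Int × Int) Int) (key : Int → Int → Int × Int)
    (unkey : Int → Int → Int × Int) :
    PySem.Dict (Int × Int) (Option (Int × Int) × Option (Int × Int)) :=
  let lines : PySem.Dict Int (List Int) :=
    cnt.keys.foldl (fun d p => d.modify (key p.1 p.2).1 [] (fun l => l ++ [(key p.1 p.2).2])) PySem.Dict.empty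
  lines.items.foldl (fun nbr kv =>
    let k := kv.1
    let vals := PySem.List.sorted kv.2 (fun v => v) false
    let m := vals.length
    (List.range m).foldl (fun nbr i =>
      nbr.insert (unkey k (vals.getD i 0))
        ((if 0 < i then some (unkey k (vals.getD (i - 1) 0)) else none),
         (if i + 1 < m then some (unkey k (vals.getD (i + 1) 0)) else none))) nbr) PySem.Dict.empty

-- Source B's nested marked(p): p occurs once and has exactly one neighbour in total
def pvMarked (cnt : PySem.Dict (Int × Int) Int)
    (hori vert diag anti : PySem.Dict (Int × Int) (Option (Int × Int) × Option (Int × Int)))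
    (p : Int × Int) : Bool :=
  if cnt.getD p 0 > 1 then false
  else ((if (hori.getD p (none, none)).1.isSome then (1:Int) else 0) +
        (if (hori.getD p (none, none)).2.isSome then 1 else 0) +
        ((if (vert.getD p (none, none)).1.isSome then 1 else 0) +
         (if (vert.getD p (none, none)).2.isSome then 1 else 0)) +
        ((if (diag.getD p (none, none)).1.isSome then 1 else 0) +
         (if (diag.getD p (none, none)).2.isSome then 1 else 0)) +
        ((if (anti.getD p (none, none)).1.isSome then 1 else 0) +
         (if (anti.getD p (none, none)).2.isSome then 1 else 0))) == 1

-- Source B's nested alive(nbr, p)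
def pvAlive (marked : (Int × Int) → Bool)
    (nbr : PySem.Dict (Int × Int) (Option (Int × Int) × Option (Int × Int)))
    (p : Int × Int) : Bool :=
  match (nbr.getD p (none, none)).1, (nbr.getD p (none, none)).2 with
  | none, none => false
  | some a, none => !(marked a)
  | none, some b => !(marked b)
  | some _, some _ => true

def doomed_gambit_alt (coords : List (Int × Int)) : List (Int × Int) :=
  -- cnt[p] = cnt.get(p, 0) + 1 over coords is collections.Counter(coords)
  let cnt : PySem.Dict (Int × Int) Int := coords.foldl (fun d p => d.insert p (d.getD p 0 + 1)) PySem.Dict.empty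
  let hori := pvSteps cnt (fun x y => (x, y)) (fun k s => (k, s))
  let vert := pvSteps cnt (fun x y => (y, x)) (fun k s => (s, k))
  let diag := pvSteps cnt (fun x y => (x + y, x)) (fun k s => (s, k - s))
  let anti := pvSteps cnt (fun x y => (y - x, x)) (fun k s => (s, k + s))
  let marked : (Int × Int) → Bool := pvMarked cnt hori vert diag anti
  let alive := pvAlive marked
  let out := PySem.List.sorted2 coords (fun p => p.2 - p.1) (fun p => p.1)
  out.filter (fun p => cnt.getD p 0 > 1 ||
    (alive hori p && alive vert p && alive diag p && alive anti p))

-- ===== PRECONDITION & SPEC =====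
def Spec_doomed_gambit (coords : List (Int × Int)) (out : List (Int × Int)) : Prop := out = doomed_gambit_alt coords
instance (coords : List (Int × Int)) (out : List (Int × Int)) : Decidable (Spec_doomed_gambit coords out) := by unfold Spec_doomed_gambit; infer_instance

-- ===== CLAIM (what is proved, stated in full; the proofs are below) =====
def Claim_equal_doomed_gambit : Prop := ∀ (coords : List (Int × Int)), Dom_doomed_gambit coords → Spec_doomed_gambit coords (doomed_gambit coords)

-- ===== LEMMAS AND PROOFS =====


-- strict "stable" order: primary key, secondary key, then an injective Nat tag
def pvS {α κ₁ κ₂ : Type} [LinearOrder κ₁] [LinearOrder κ₂] (k1 : α → κ₁) (k2 : α → κ₂) (g : α → Nat) (a b : α) : Prop :=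
  k1 a < k1 b ∨ (k1 a = k1 b ∧ (k2 a < k2 b ∨ (k2 a = k2 b ∧ g a < g b)))

def pvBef {α κ₁ κ₂ : Type} [LinearOrder κ₁] [LinearOrder κ₂] (k1 : α → κ₁) (k2 : α → κ₂) (a b : α) : Bool :=
  decide (k1 a < k1 b) || (!decide (k1 b < k1 a) && decide (k2 a < k2 b))

theorem pvS_trans {α κ₁ κ₂ : Type} [LinearOrder κ₁] [LinearOrder κ₂] (k1 : α → κ₁) (k2 : α → κ₂) (g : α → Nat)
    {a b c : α} (h1 : pvS k1 k2 g a b) (h2 : pvS k1 k2 g b c) : pvS k1 k2 g a c := by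
  rcases h1 with h1 | ⟨e1, h1⟩
  · rcases h2 with h2 | ⟨e2, h2⟩
    · exact Or.inl (lt_trans h1 h2)
    · exact Or.inl (e2 ▸ h1)
  · rcases h2 with h2 | ⟨e2, h2⟩
    · exact Or.inl (e1 ▸ h2)
    · refine Or.inr ⟨e1.trans e2, ?_⟩
      rcases h1 with h1 | ⟨f1, h1⟩
      · rcases h2 with h2 | ⟨f2, h2⟩
        · exact Or.inl (lt_trans h1 h2)
        · exact Or.inl (f2 ▸ h1)
      · rcases h2 with h2 | ⟨f2, h2⟩
        · exact Or.inl (f1 ▸ h2)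
        · exact Or.inr ⟨f1.trans f2, lt_trans h1 h2⟩

theorem pvS_not_sym {α κ₁ κ₂ : Type} [LinearOrder κ₁] [LinearOrder κ₂] (k1 : α → κ₁) (k2 : α → κ₂) (g : α → Nat)
    {a b : α} (h1 : pvS k1 k2 g a b) (h2 : pvS k1 k2 g b a) : False := by
  rcases h1 with h1 | ⟨e1, h1⟩ <;> rcases h2 with h2 | ⟨e2, h2⟩
  · exact absurd h2 (not_lt.mpr (le_of_lt h1))
  · exact absurd h1 (not_lt.mpr (le_of_eq e2))
  · exact absurd h2 (not_lt.mpr (le_of_eq e1))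
  · rcases h1 with h1 | ⟨f1, h1⟩ <;> rcases h2 with h2 | ⟨f2, h2⟩
    · exact absurd h2 (not_lt.mpr (le_of_lt h1))
    · exact absurd h1 (not_lt.mpr (le_of_eq f2))
    · exact absurd h2 (not_lt.mpr (le_of_eq f1))
    · omega

theorem pvBef_true_S {α κ₁ κ₂ : Type} [LinearOrder κ₁] [LinearOrder κ₂] (k1 : α → κ₁) (k2 : α → κ₂) (g : α → Nat)
    {a b : α} (h : pvBef k1 k2 a b = true) : pvS k1 k2 g a b := by
  simp only [pvBef, Bool.or_eq_true, Bool.and_eq_true, Bool.not_eq_true', decide_eq_true_eq, decide_eq_false_iff_not] at h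
  rcases h with h | ⟨h1, h2⟩
  · exact Or.inl h
  · rcases lt_or_ge (k1 a) (k1 b) with h3 | h3
    · exact Or.inl h3
    · exact Or.inr ⟨le_antisymm (not_lt.mp h1) h3, Or.inl h2⟩

theorem pvBef_false {α κ₁ κ₂ : Type} [LinearOrder κ₁] [LinearOrder κ₂] (k1 : α → κ₁) (k2 : α → κ₂) (g : α → Nat)
    {a b : α} (h : pvBef k1 k2 a b = false)
    (htag : k1 b = k1 a → k2 b = k2 a → g b < g a) : pvS k1 k2 g b a := by
  simp only [pvBef, Bool.or_eq_false_iff, Bool.and_eq_false_iff, Bool.not_eq_false', decide_eq_true_eq, decide_eq_false_iff_not] at h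
  obtain ⟨h1, h2⟩ := h
  rcases lt_or_ge (k1 b) (k1 a) with h3 | h3
  · exact Or.inl h3
  · have e1 : k1 b = k1 a := le_antisymm (not_lt.mp h1) h3
    refine Or.inr ⟨e1, ?_⟩
    have h2' : ¬ k2 a < k2 b := by
      rcases h2 with h2 | h2
      · exact absurd h2 (by rw [e1]; exact lt_irrefl _)
      · exact h2
    rcases lt_or_ge (k2 b) (k2 a) with h4 | h4
    · exact Or.inl h4
    · have e2 : k2 b = k2 a := le_antisymm (not_lt.mp h2') h4
      exact Or.inr ⟨e2, htag e1 e2⟩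

theorem pvPairwise_insertBy {α κ₁ κ₂ : Type} [LinearOrder κ₁] [LinearOrder κ₂] (k1 : α → κ₁) (k2 : α → κ₂) (g : α → Nat)
    (m : α) (acc : List α) (hacc : acc.Pairwise (pvS k1 k2 g))
    (hm : ∀ a ∈ acc, k1 a = k1 m → k2 a = k2 m → g a < g m) :
    (PySem.List.insertBy (pvBef k1 k2) m acc).Pairwise (pvS k1 k2 g) := by
  induction acc with
  | nil => simp [PySem.List.insertBy]
  | cons y ys ih =>
    rw [List.pairwise_cons] at hacc
    obtain ⟨hy, hys⟩ := hacc
    by_cases h : pvBef k1 k2 m y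
    · simp only [PySem.List.insertBy, h, if_pos]
      refine List.Pairwise.cons ?_ (List.Pairwise.cons hy hys)
      intro z hz
      rcases List.mem_cons.mp hz with rfl | hz
      · exact pvBef_true_S k1 k2 g h
      · exact pvS_trans k1 k2 g (pvBef_true_S k1 k2 g h) (hy z hz)
    · have hf : pvBef k1 k2 m y = false := by simpa using h
      simp only [PySem.List.insertBy, hf]
      refine List.Pairwise.cons ?_ (ih hys (fun a ha => hm a (List.mem_cons_of_mem y ha)))
      intro z hz
      rw [PySem.List.mem_insertBy] at hz
      rcases hz with rfl | hz
      · exact pvBef_false k1 k2 g hf (fun e1 e2 => hm y List.mem_cons_self e1 e2)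
      · exact hy z hz

theorem pvStable_foldl {α κ₁ κ₂ : Type} [LinearOrder κ₁] [LinearOrder κ₂] (k1 : α → κ₁) (k2 : α → κ₂) (g : α → Nat)
    (M : List α) (acc : List α)
    (hM : M.Pairwise (fun a b => k1 a = k1 b → k2 a = k2 b → g a < g b))
    (hacc : acc.Pairwise (pvS k1 k2 g))
    (hcross : ∀ a ∈ acc, ∀ b ∈ M, k1 a = k1 b → k2 a = k2 b → g a < g b) :
    (M.foldl (fun acc x => PySem.List.insertBy (pvBef k1 k2) x acc) acc).Pairwise (pvS k1 k2 g) := by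
  induction M generalizing acc with
  | nil => exact hacc
  | cons m rest ih =>
    rw [List.pairwise_cons] at hM
    obtain ⟨hmrest, hrest⟩ := hM
    simp only [List.foldl_cons]
    have hacc' := pvPairwise_insertBy k1 k2 g m acc hacc (fun a ha => hcross a ha m List.mem_cons_self)
    refine ih _ hrest hacc' ?_
    intro a ha b hb
    rw [PySem.List.mem_insertBy] at ha
    rcases ha with rfl | ha
    · exact hmrest b hb
    · exact hcross a ha b (List.mem_cons_of_mem m hb)

-- sorted2 (reverse = false) IS the insertBy fold with pvBef
theorem pvSorted2_eq_foldl {α κ₁ κ₂ : Type} [LinearOrder κ₁] [LinearOrder κ₂] (xs : List α) (k1 : α → κ₁) (k2 : α → κ₂) :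
    PySem.List.sorted2 xs k1 k2 = xs.foldl (fun acc x => PySem.List.insertBy (pvBef k1 k2) x acc) [] := by
  simp only [PySem.List.sorted2]
  unfold pvBef
  rfl

theorem pvSorted2_pairwise {α κ₁ κ₂ : Type} [LinearOrder κ₁] [LinearOrder κ₂] (xs : List α) (k1 : α → κ₁) (k2 : α → κ₂) (g : α → Nat)
    (hT : xs.Pairwise (fun a b => k1 a = k1 b → k2 a = k2 b → g a < g b)) :
    (PySem.List.sorted2 xs k1 k2).Pairwise (pvS k1 k2 g) := by
  rw [pvSorted2_eq_foldl]
  exact pvStable_foldl k1 k2 g xs [] hT (List.Pairwise.nil) (by intro a ha; cases ha)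

theorem pvSorted_unique {α κ₁ κ₂ : Type} [LinearOrder κ₁] [LinearOrder κ₂] (k1 : α → κ₁) (k2 : α → κ₂) (g : α → Nat)
    (l₁ l₂ : List α) (hp : l₁.Perm l₂)
    (h1 : l₁.Pairwise (pvS k1 k2 g)) (h2 : l₂.Pairwise (pvS k1 k2 g)) : l₁ = l₂ := by
  exact hp.eq_of_pairwise (fun a b _ _ hab hba => absurd hba (fun h => pvS_not_sym k1 k2 g hab h)) h1 h2

theorem pvS_le1 {α κ₁ κ₂ : Type} [LinearOrder κ₁] [LinearOrder κ₂] {k1 : α → κ₁} {k2 : α → κ₂} {g : α → Nat}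
    {a b : α} (h : pvS k1 k2 g a b) : k1 a ≤ k1 b := by
  rcases h with h | ⟨h, _⟩
  · exact le_of_lt h
  · exact le_of_eq h

theorem pvNbrA_eq (p s : Nat → Int) (L₁ L₂ : List Nat) (i : Nat)
    (hpw : (L₁ ++ i :: L₂).Pairwise (pvS p s id)) (hni : i ∉ L₁) :
    pvNbrA p (L₁ ++ i :: L₂) i =
      ((L₁.filter (fun j => decide (p j = p i))).getLast?).toList ++
      ((L₂.filter (fun j => decide (p j = p i))).head?).toList := by
  rw [List.pairwise_append] at hpw
  obtain ⟨hpw₁, hpw₂, hcross⟩ := hpw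
  rw [List.pairwise_cons] at hpw₂
  obtain ⟨hiL₂, hpwL₂⟩ := hpw₂
  have ht : (L₁ ++ i :: L₂).idxOf i = L₁.length := by
    rw [List.idxOf_append, if_neg (by simpa using hni)]
    simp
  have hc : (L₁ ++ i :: L₂).getD L₁.length 0 = i := by
    rw [List.getD_append_right _ _ _ _ (le_refl _)]; simp
  unfold pvNbrA
  simp only [ht, hc]
  congr 1
  -- left part
  · rcases List.eq_nil_or_concat' L₁ with rfl | ⟨M, z, rfl⟩
    · simp
    · have hz1 : ((M ++ [z]) ++ i :: L₂).getD ((M ++ [z]).length - 1) 0 = z := by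
        rw [List.length_append]
        simp only [List.length_singleton, Nat.add_sub_cancel]
        rw [List.getD_append _ _ _ _ (by simp)]
        rw [List.getD_append_right _ _ _ _ (le_refl _)]; simp
      rw [hz1]
      by_cases hpz : p i = p z
      · rw [if_pos ⟨by simp, hpz⟩]
        rw [List.filter_append]
        simp [hpz.symm]
      · rw [if_neg (by rintro ⟨-, h⟩; exact hpz h)]
        have hzi : p z < p i := by
          have hSzi : pvS p s id z i := hcross z (by simp) i (List.mem_cons_self)
          rcases hSzi with h | ⟨h, -⟩
          · exact h
          · exact absurd h.symm hpz
        have : (M ++ [z]).filter (fun j => decide (p j = p i)) = [] := by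
          rw [List.filter_eq_nil_iff]
          intro a ha
          simp only [decide_eq_true_eq]
          rcases List.mem_append.mp ha with ha | ha
          · have hSaz : pvS p s id a z := by
              have := (List.pairwise_append.mp hpw₁).2.2
              exact this a ha z (by simp)
            have : p a ≤ p z := pvS_le1 hSaz
            omega
          · have : a = z := by simpa using ha
            subst this; omega
        rw [this]
        simp
  -- right part
  · have hq : (L₁ ++ i :: L₂).length = L₁.length + L₂.length + 1 := by simp; omega
    rcases L₂ with _ | ⟨w, L₂'⟩
    · rw [if_neg (by rw [hq]; simp)]
      simp
    · have hw : (L₁ ++ i :: w :: L₂').getD (L₁.length + 1) 0 = w := by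
        rw [List.getD_append_right _ _ _ _ (by omega)]; simp
      rw [hw]
      by_cases hpw' : p i = p w
      · rw [if_pos ⟨by rw [hq]; simp, hpw'⟩]
        simp [hpw'.symm]
      · rw [if_neg (by rintro ⟨-, h⟩; exact hpw' h)]
        have hiw : p i < p w := by
          have hSiw : pvS p s id i w := hiL₂ w (by simp)
          rcases hSiw with h | ⟨h, -⟩
          · exact h
          · exact absurd h hpw'
        have : (w :: L₂').filter (fun j => decide (p j = p i)) = [] := by
          rw [List.filter_eq_nil_iff]
          intro a ha
          simp only [decide_eq_true_eq]
          rcases List.mem_cons.mp ha with rfl | ha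
          · omega
          · have hSwa : pvS p s id w a := (List.pairwise_cons.mp hpwL₂).1 a ha
            have : p w ≤ p a := pvS_le1 hSwa
            omega
        rw [this]
        simp

theorem pvBase (p s : Nat → Int) (n : Nat) :
    (PySem.List.sorted2 (List.range n) p s).Pairwise (pvS p s id) := by
  apply pvSorted2_pairwise
  exact List.pairwise_lt_range.imp (fun {a b} h _ _ => h)

theorem pvChain (p₁ s₁ p₂ s₂ : Nat → Int) (M : List Nat)
    (hpw : M.Pairwise (pvS p₁ s₁ id))
    (hdet : ∀ a b : Nat, p₂ a = p₂ b → s₂ a = s₂ b → p₁ a = p₁ b ∧ s₁ a = s₁ b) :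
    (PySem.List.sorted2 M p₂ s₂).Pairwise (pvS p₂ s₂ id) := by
  apply pvSorted2_pairwise
  refine hpw.imp ?_
  intro a b hab h2p h2s
  obtain ⟨h1p, h1s⟩ := hdet a b h2p h2s
  rcases hab with h | ⟨h, h'⟩
  · exact absurd h1p (ne_of_lt h)
  · rcases h' with h' | ⟨h2, h3⟩
    · exact absurd h1s (ne_of_lt h')
    · exact h3

-- ----- generic option/extremum helpers -----

theorem pvMax?_eq (l : List Int) (m : Int) (h1 : m ∈ l) (h2 : ∀ y ∈ l, y ≤ m) :
    PySem.List.max? l (fun v => v) = some m := by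
  rcases h : PySem.List.max? l (fun v => v) with _ | m'
  · rw [PySem.List.max?_eq_none_iff] at h
    subst h; cases h1
  · have hm' := PySem.List.max?_mem h
    have hall := PySem.List.max?_isMax h m h1
    exact congrArg some (le_antisymm hall (h2 m' hm')).symm

theorem pvMin?_eq (l : List Int) (m : Int) (h1 : m ∈ l) (h2 : ∀ y ∈ l, m ≤ y) :
    PySem.List.min? l (fun v => v) = some m := by
  rcases h : PySem.List.min? l (fun v => v) with _ | m'
  · rw [PySem.List.min?_eq_none_iff] at h
    subst h; cases h1
  · have hm' := PySem.List.min?_mem h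
    have hall := PySem.List.min?_isMin h m h1
    exact congrArg some (le_antisymm (h2 m' hm') hall).symm

-- list.count seen through positions (getD over range)
theorem pvCount_eq {α : Type} [BEq α] [LawfulBEq α] (l : List α) (p : α) (d : α) :
    l.count p = ((List.range l.length).filter (fun j => l.getD j d == p)).length := by
  induction l using List.reverseRecOn with
  | nil => simp
  | append_singleton l x ih =>
    rw [List.count_append, List.length_append]
    simp only [List.length_singleton, List.range_succ, List.filter_append]
    have h1 : (List.range l.length).filter (fun j => (l ++ [x]).getD j d == p)
        = (List.range l.length).filter (fun j => l.getD j d == p) := by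
      apply List.filter_congr
      intro j hj
      rw [List.getD_append _ _ _ _ (List.mem_range.mp hj)]
    have h2 : (l ++ [x]).getD l.length d = x := by
      rw [List.getD_append_right _ _ _ _ (le_refl _)]; simp
    rw [List.length_append, h1, ← ih]
    by_cases hx : x = p
    · subst hx
      simp only [List.filter_singleton, h2, beq_self_eq_true]
      simp
    · simp only [List.filter_singleton, h2]
      have : (x == p) = false := by simp [hx]
      simp [this, hx]


theorem pvUniqueIdx {α : Type} [BEq α] [LawfulBEq α] (l : List α) (p : α) (d : α)
    (hc : l.count p ≤ 1) (a b : Nat) (ha : a < l.length) (hb : b < l.length)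
    (hpa : l.getD a d = p) (hpb : l.getD b d = p) : a = b := by
  rw [pvCount_eq l p d] at hc
  have haS : a ∈ (List.range l.length).filter (fun j => l.getD j d == p) :=
    List.mem_filter.mpr ⟨List.mem_range.mpr ha, by simp only [beq_iff_eq]; exact hpa⟩
  have hbS : b ∈ (List.range l.length).filter (fun j => l.getD j d == p) :=
    List.mem_filter.mpr ⟨List.mem_range.mpr hb, by simp only [beq_iff_eq]; exact hpb⟩
  rcases hsp : (List.range l.length).filter (fun j => l.getD j d == p) with _ | ⟨x, t⟩
  · rw [hsp] at haS; cases haS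
  · rcases t with _ | ⟨y, t'⟩
    · rw [hsp] at haS hbS
      simp only [List.mem_singleton] at haS hbS
      omega
    · rw [hsp] at hc
      simp at hc

theorem pvMemIdx {α : Type} (l : List α) (q : α) (d : α) :
    q ∈ l ↔ ∃ a, a < l.length ∧ l.getD a d = q := by
  constructor
  · intro h
    obtain ⟨a, ha, he⟩ := List.mem_iff_getElem.mp h
    exact ⟨a, ha, by rw [List.getD_eq_getElem _ _ ha]; exact he⟩
  · rintro ⟨a, ha, he⟩
    rw [← he, List.getD_eq_getElem _ _ ha]
    exact List.getElem_mem _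

-- ----- the inner write loop of pvSteps -----

def pvPS (emb : Int → Int × Int) (b : List Int) (i : Nat) :
    Option (Int × Int) × Option (Int × Int) :=
  ((if 0 < i then some (emb (b.getD (i - 1) 0)) else none),
   (if i + 1 < b.length then some (emb (b.getD (i + 1) 0)) else none))

theorem pvInner_ne (b : List Int) (emb : Int → Int × Int)
    (nb : PySem.Dict (Int × Int) (Option (Int × Int) × Option (Int × Int))) (p : Int × Int)
    (h : ∀ v ∈ b, emb v ≠ p) :
    (((List.range b.length).foldl (fun nb i => nb.insert (emb (b.getD i 0)) (pvPS emb b i)) nb)).getD p (none, none)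
      = nb.getD p (none, none) := by
  suffices H : ∀ m, m ≤ b.length → (((List.range m).foldl (fun nb i => nb.insert (emb (b.getD i 0)) (pvPS emb b i)) nb)).getD p (none, none) = nb.getD p (none, none) from
    H b.length (le_refl _)
  intro m
  induction m with
  | zero => intro _; simp
  | succ m ih =>
    intro hm
    rw [List.range_succ, List.foldl_append, List.foldl_cons, List.foldl_nil]
    rw [PySem.Dict.getD_insert, if_neg, ih (by omega)]
    intro hc
    have hmem : b.getD m 0 ∈ b := by
      rw [List.getD_eq_getElem _ _ (by omega)]
      exact List.getElem_mem _
    exact h _ hmem hc.symm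

theorem pvInner_mem (b : List Int) (emb : Int → Int × Int)
    (nb : PySem.Dict (Int × Int) (Option (Int × Int) × Option (Int × Int)))
    (hnd : b.Nodup) (hinj : ∀ v w, emb v = emb w → v = w) (i0 : Nat) (hi : i0 < b.length) :
    (((List.range b.length).foldl (fun nb i => nb.insert (emb (b.getD i 0)) (pvPS emb b i)) nb)).getD (emb (b.getD i0 0)) (none, none)
      = pvPS emb b i0 := by
  suffices H : ∀ m, i0 < m → m ≤ b.length → (((List.range m).foldl (fun nb i => nb.insert (emb (b.getD i 0)) (pvPS emb b i)) nb)).getD (emb (b.getD i0 0)) (none, none) = pvPS emb b i0 from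
    H b.length hi (le_refl _)
  intro m
  induction m with
  | zero => omega
  | succ m ih =>
    intro h1 h2
    rw [List.range_succ, List.foldl_append, List.foldl_cons, List.foldl_nil]
    rw [PySem.Dict.getD_insert]
    by_cases he : i0 = m
    · subst he
      rw [if_pos rfl]
    · rw [if_neg, ih (by omega) (by omega)]
      intro hc
      have := hinj _ _ hc
      rw [List.getD_eq_getElem _ _ (by omega : i0 < b.length), List.getD_eq_getElem _ _ (by omega : m < b.length)] at this
      have hx := List.nodup_iff_injective_getElem.mp hnd
      have := hx (a₁ := ⟨i0, by omega⟩) (a₂ := ⟨m, by omega⟩) this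
      exact he (by simpa using congrArg Fin.val this)

-- ----- the outer loop of pvSteps over the line buckets -----

theorem pvOuter_skip (g : Int → List Int) (u : Int → Int → Int × Int) (p : Int × Int) (K : List Int)
    (nb : PySem.Dict (Int × Int) (Option (Int × Int) × Option (Int × Int)))
    (h : ∀ k ∈ K, ∀ v ∈ g k, u k v ≠ p) :
    ((K.foldl (fun nb k => (List.range (g k).length).foldl
        (fun nb i => nb.insert (u k ((g k).getD i 0)) (pvPS (u k) (g k) i)) nb) nb)).getD p (none, none)
      = nb.getD p (none, none) := by
  induction K generalizing nb with
  | nil => rfl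
  | cons k K' ih =>
    rw [List.foldl_cons]
    rw [ih _ (fun k' hk' => h k' (List.mem_cons_of_mem k hk'))]
    exact pvInner_ne (g k) (u k) nb p (h k List.mem_cons_self)

theorem pvOuter_main (g : Int → List Int) (u : Int → Int → Int × Int) (p : Int × Int) (k0 : Int) (K : List Int)
    (nb : PySem.Dict (Int × Int) (Option (Int × Int) × Option (Int × Int)))
    (hK : K.Nodup) (hk0 : k0 ∈ K)
    (hother : ∀ k, k ≠ k0 → ∀ v ∈ g k, u k v ≠ p)
    (hnd : (g k0).Nodup) (hinj : ∀ v w, u k0 v = u k0 w → v = w)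
    (i0 : Nat) (hi : i0 < (g k0).length) (hp : u k0 ((g k0).getD i0 0) = p) :
    ((K.foldl (fun nb k => (List.range (g k).length).foldl
        (fun nb i => nb.insert (u k ((g k).getD i 0)) (pvPS (u k) (g k) i)) nb) nb)).getD p (none, none)
      = pvPS (u k0) (g k0) i0 := by
  induction K generalizing nb with
  | nil => cases hk0
  | cons k K' ih =>
    rw [List.foldl_cons]
    rw [List.nodup_cons] at hK
    rcases List.mem_cons.mp hk0 with h0 | h0
    · subst h0
      rw [pvOuter_skip g u p K' _ (fun k' hk' => hother k' (fun hc => hK.1 (hc ▸ hk')))]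
      rw [← hp]
      exact pvInner_mem (g k0) (u k0) nb hnd hinj i0 hi
    · exact ih _ hK.2 h0

-- ----- B's per-direction specification -----

def pvBelowOffs (coords : List (Int × Int)) (key : Int → Int → Int × Int) (p : Int × Int) : List Int :=
  ((PySem.List.dedup coords).filter (fun q =>
      (key q.1 q.2).1 == (key p.1 p.2).1 && (key q.1 q.2).2 < (key p.1 p.2).2)).map (fun q => (key q.1 q.2).2)

def pvAboveOffs (coords : List (Int × Int)) (key : Int → Int → Int × Int) (p : Int × Int) : List Int :=
  ((PySem.List.dedup coords).filter (fun q =>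
      (key q.1 q.2).1 == (key p.1 p.2).1 && (key p.1 p.2).2 < (key q.1 q.2).2)).map (fun q => (key q.1 q.2).2)

def pvPredC (coords : List (Int × Int)) (key unkey : Int → Int → Int × Int) (p : Int × Int) : Option (Int × Int) :=
  (PySem.List.max? (pvBelowOffs coords key p) (fun v => v)).map (fun v => unkey (key p.1 p.2).1 v)

def pvSuccC (coords : List (Int × Int)) (key unkey : Int → Int → Int × Int) (p : Int × Int) : Option (Int × Int) :=
  (PySem.List.min? (pvAboveOffs coords key p) (fun v => v)).map (fun v => unkey (key p.1 p.2).1 v)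

theorem pvSteps_getD (coords : List (Int × Int)) (key unkey : Int → Int → Int × Int)
    (hku : ∀ k s, key (unkey k s).1 (unkey k s).2 = (k, s))
    (hinv : ∀ p : Int × Int, unkey (key p.1 p.2).1 (key p.1 p.2).2 = p)
    (p : Int × Int) (hp : p ∈ coords) :
    (pvSteps (PySem.Dict.counter coords) key unkey).getD p (none, none)
      = (pvPredC coords key unkey p, pvSuccC coords key unkey p) := by
  have hkinj : ∀ q r : Int × Int, key q.1 q.2 = key r.1 r.2 → q = r := by
    intro q r h
    rw [← hinv q, ← hinv r, h]
  set pts := PySem.List.dedup coords with hpts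
  have hptsS : pts = PySem.Set.ofList coords := PySem.List.dedup_eq_ofList coords
  have hppts : p ∈ pts := (PySem.List.mem_dedup coords p).mpr hp
  have hptsnd : pts.Nodup := PySem.List.nodup_dedup coords
  set k0 := (key p.1 p.2).1 with hk0
  set v0 := (key p.1 p.2).2 with hv0
  set bucket := (pts.filter (fun q => (key q.1 q.2).1 == k0)).map (fun q => (key q.1 q.2).2) with hbucket
  have hmem_bucket : ∀ v, v ∈ bucket ↔ ∃ q ∈ pts, (key q.1 q.2).1 = k0 ∧ (key q.1 q.2).2 = v := by
    intro v
    rw [hbucket]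
    simp only [List.mem_map, List.mem_filter, beq_iff_eq]
    constructor
    · rintro ⟨q, ⟨hq1, hq2⟩, hq3⟩
      exact ⟨q, hq1, hq2, hq3⟩
    · rintro ⟨q, hq1, hq2, hq3⟩
      exact ⟨q, ⟨hq1, hq2⟩, hq3⟩
  have hbnd : bucket.Nodup := by
    rw [hbucket]
    refine List.Nodup.map_on ?_ (hptsnd.filter _)
    intro q hq r hr he
    have hq2 := (List.mem_filter.mp hq).2
    have hr2 := (List.mem_filter.mp hr).2
    simp only [beq_iff_eq] at hq2 hr2
    exact hkinj q r (by rw [Prod.ext_iff]; exact ⟨hq2.trans hr2.symm, he⟩)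
  -- unfold the pvSteps definition
  show ((((PySem.Dict.counter coords).keys.foldl (fun d q => d.modify (key q.1 q.2).1 [] (fun l => l ++ [(key q.1 q.2).2])) PySem.Dict.empty)).items.foldl _ PySem.Dict.empty).getD p (none, none) = _
  rw [PySem.Dict.keys_counter, ← hptsS]
  set lines := pts.foldl (fun d q => d.modify (key q.1 q.2).1 [] (fun l => l ++ [(key q.1 q.2).2])) PySem.Dict.empty with hlines
  have hlget : ∀ k, lines.getD k [] = (pts.filter (fun q => (key q.1 q.2).1 == k)).map (fun q => (key q.1 q.2).2) := by
    intro k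
    have h := PySem.Dict.getD_foldl_modify_append (pts.map (fun q => ((key q.1 q.2).1, (key q.1 q.2).2))) PySem.Dict.empty k
    rw [List.foldl_map] at h
    rw [hlines]
    simpa [List.filter_map, List.map_map, Function.comp_def] using h
  have hlkeys : lines.keys = PySem.Set.ofList (pts.map (fun q => (key q.1 q.2).1)) := by
    rw [hlines, PySem.Dict.keys_foldl_modify_key, PySem.Dict.keys_empty, PySem.Set.update_nil_left]
  have hlknd : lines.keys.Nodup := by
    rw [hlkeys]; exact PySem.Set.nodup_ofList _
  have hk0K : k0 ∈ lines.keys := by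
    rw [hlkeys]
    exact (PySem.Set.mem_ofList _ _).mpr (List.mem_map_of_mem hppts)
  rw [PySem.Dict.items_eq_map_keys lines hlknd [], List.foldl_map]
  set g : Int → List Int := fun k => PySem.List.sorted (lines.getD k []) (fun v => v) false with hg
  have hgmem : ∀ k v, v ∈ g k ↔ v ∈ (pts.filter (fun q => (key q.1 q.2).1 == k)).map (fun q => (key q.1 q.2).2) := by
    intro k v
    simp only [hg]
    rw [PySem.List.mem_sorted, hlget]
  have hfun : (fun (nbr : PySem.Dict (Int × Int) (Option (Int × Int) × Option (Int × Int))) (k : Int) =>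
      (List.range (PySem.List.sorted (lines.getD k []) (fun v => v) false).length).foldl
        (fun nbr i => nbr.insert (unkey k ((PySem.List.sorted (lines.getD k []) (fun v => v) false).getD i 0))
          ((if 0 < i then some (unkey k ((PySem.List.sorted (lines.getD k []) (fun v => v) false).getD (i - 1) 0)) else none),
           (if i + 1 < (PySem.List.sorted (lines.getD k []) (fun v => v) false).length then some (unkey k ((PySem.List.sorted (lines.getD k []) (fun v => v) false).getD (i + 1) 0)) else none))) nbr)
      = (fun nb k => (List.range (g k).length).foldl
          (fun nb i => nb.insert (unkey k ((g k).getD i 0)) (pvPS (unkey k) (g k) i)) nb) := by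
    funext nb k
    rfl
  rw [hfun]
  -- locate p inside its own sorted bucket
  have hgb : g k0 = PySem.List.sorted bucket (fun v => v) false := by
    simp only [hg]
    rw [hlget, hbucket]
  have hbperm : (g k0).Perm bucket := by
    rw [hgb]; exact PySem.List.sorted_perm _ _ _
  have hb005 : (g k0).Nodup := (hbperm.nodup_iff).mpr hbnd
  have hblt : (g k0).Pairwise (· < ·) := by
    have h1 : (g k0).Pairwise (· ≤ ·) := by
      rw [hgb]
      exact PySem.List.sorted_pairwise bucket (fun v => v)
    exact (List.Pairwise.and h1 hb005).imp (fun {a b} h => lt_of_le_of_ne h.1 h.2)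
  have hv0b : v0 ∈ g k0 := by
    rw [hgmem]
    exact (hmem_bucket v0).mpr ⟨p, hppts, rfl, rfl⟩
  obtain ⟨i0, hi0, hie⟩ := List.mem_iff_getElem.mp hv0b
  have hmain := pvOuter_main g unkey p k0 lines.keys PySem.Dict.empty hlknd hk0K
    (by
      intro k hk v hv hc
      have := hku k v
      rw [hc] at this
      exact hk (by rw [hk0, this]))
    hb005
    (by
      intro v w hvw
      have h1 := hku k0 v
      have h2 := hku k0 w
      rw [hvw, h2] at h1
      exact (Prod.ext_iff.mp h1).2.symm)
    i0 hi0
    (by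
      rw [List.getD_eq_getElem _ _ hi0, hie, hv0, hk0]
      exact hinv p)
  rw [hmain]
  -- evaluate pvPS at the window around position i0
  have hdec : g k0 = (g k0).take i0 ++ v0 :: (g k0).drop (i0 + 1) := by
    conv_lhs => rw [← List.take_append_drop i0 (g k0)]
    rw [List.drop_eq_getElem_cons hi0, hie]
  set B1 := (g k0).take i0 with hB1
  set B2 := (g k0).drop (i0 + 1) with hB2
  obtain ⟨hpw1, hpw2, hcross⟩ := List.pairwise_append.mp (hdec ▸ hblt)
  have hv0B2 : ∀ y ∈ B2, v0 < y := (List.pairwise_cons.mp hpw2).1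
  have hB1v0 : ∀ y ∈ B1, y < v0 := fun y hy => hcross y hy v0 List.mem_cons_self
  have hsplit : ∀ v, v ∈ g k0 ↔ (v ∈ B1 ∨ v = v0 ∨ v ∈ B2) := by
    intro v
    conv_lhs => rw [hdec]
    simp [List.mem_append]
  have hlenB1 : B1.length = i0 := by
    rw [hB1, List.length_take]
    omega
  have hlen : (g k0).length = i0 + 1 + B2.length := by
    conv_lhs => rw [hdec]
    simp only [List.length_append, List.length_cons, hlenB1]
    omega
  have hbelow : ∀ v, v ∈ pvBelowOffs coords key p ↔ (v ∈ bucket ∧ v < v0) := by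
    intro v
    rw [hmem_bucket]
    simp only [pvBelowOffs, List.mem_map, List.mem_filter, Bool.and_eq_true, beq_iff_eq,
      decide_eq_true_eq, ← hpts, ← hk0, ← hv0]
    constructor
    · rintro ⟨q, ⟨hq1, hq2, hq3⟩, hq4⟩
      exact ⟨⟨q, hq1, hq2, hq4⟩, hq4 ▸ hq3⟩
    · rintro ⟨⟨q, hq1, hq2, hq4⟩, hlt⟩
      exact ⟨q, ⟨hq1, hq2, hq4 ▸ hlt⟩, hq4⟩
  have habove : ∀ v, v ∈ pvAboveOffs coords key p ↔ (v ∈ bucket ∧ v0 < v) := by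
    intro v
    rw [hmem_bucket]
    simp only [pvAboveOffs, List.mem_map, List.mem_filter, Bool.and_eq_true, beq_iff_eq,
      decide_eq_true_eq, ← hpts, ← hk0, ← hv0]
    constructor
    · rintro ⟨q, ⟨hq1, hq2, hq3⟩, hq4⟩
      exact ⟨⟨q, hq1, hq2, hq4⟩, hq4 ▸ hq3⟩
    · rintro ⟨⟨q, hq1, hq2, hq4⟩, hlt⟩
      exact ⟨q, ⟨hq1, hq2, hq4 ▸ hlt⟩, hq4⟩
  have hmemg : ∀ v, v ∈ bucket ↔ v ∈ g k0 := fun v => (hbperm.mem_iff).symm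
  simp only [pvPS]
  refine Prod.ext ?_ ?_
  · -- predecessor component
    show (if 0 < i0 then some (unkey k0 ((g k0).getD (i0 - 1) 0)) else none) = pvPredC coords key unkey p
    by_cases h0 : 0 < i0
    · rcases List.eq_nil_or_concat' B1 with hB1nil | ⟨M, z, hMz⟩
      · rw [hB1nil] at hlenB1
        simp at hlenB1
        omega
      · have hziB1 : z ∈ B1 := by rw [hMz]; simp
        have hgd : (g k0).getD (i0 - 1) 0 = z := by
          conv_lhs => rw [hdec]
          rw [List.getD_append _ _ _ _ (by omega : i0 - 1 < B1.length)]
          rw [hMz]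
          have hM : M.length = i0 - 1 := by
            have := hlenB1
            rw [hMz] at this
            simp at this
            omega
          rw [List.getD_append_right _ _ _ _ (by omega), hM]
          simp
        have hmax : PySem.List.max? (pvBelowOffs coords key p) (fun v => v) = some z := by
          apply pvMax?_eq
          · rw [hbelow]
            exact ⟨(hmemg z).mpr ((hsplit z).mpr (Or.inl hziB1)), hB1v0 z hziB1⟩
          · intro y hy
            rw [hbelow] at hy
            obtain ⟨hyb, hylt⟩ := hy
            rcases (hsplit y).mp ((hmemg y).mp hyb) with hyB1 | rfl | hyB2
            · rw [hMz] at hyB1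
              rcases List.mem_append.mp hyB1 with hyM | hyz
              · have := (List.pairwise_append.mp (hMz ▸ hpw1)).2.2
                exact le_of_lt (this y hyM z (by simp))
              · simp only [List.mem_singleton] at hyz
                omega
            · omega
            · exact absurd (hv0B2 y hyB2) (by omega)
        rw [if_pos h0, hgd]
        simp only [pvPredC, hmax, Option.map_some]
        rw [hk0]
    · have hB1nil : B1 = [] := by
        rw [← List.length_eq_zero_iff]
        omega
      have hempty : pvBelowOffs coords key p = [] := by
        rw [List.eq_nil_iff_forall_not_mem]
        intro v hv
        rw [hbelow] at hv
        obtain ⟨hvb, hvlt⟩ := hv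
        rcases (hsplit v).mp ((hmemg v).mp hvb) with hvB1 | rfl | hvB2
        · rw [hB1nil] at hvB1; cases hvB1
        · omega
        · exact absurd (hv0B2 v hvB2) (by omega)
      rw [if_neg h0]
      simp [pvPredC, hempty]
  · -- successor component
    show (if i0 + 1 < (g k0).length then some (unkey k0 ((g k0).getD (i0 + 1) 0)) else none) = pvSuccC coords key unkey p
    by_cases h0 : i0 + 1 < (g k0).length
    · rcases B2 with _ | ⟨w, B2'⟩
      · rw [hlen] at h0
        simp at h0
      · have hwB2 : w ∈ w :: B2' := List.mem_cons_self
        have hgd : (g k0).getD (i0 + 1) 0 = w := by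
          conv_lhs => rw [hdec]
          rw [List.getD_append_right _ _ _ _ (by omega : B1.length ≤ i0 + 1), hlenB1]
          simp
        have hmin : PySem.List.min? (pvAboveOffs coords key p) (fun v => v) = some w := by
          apply pvMin?_eq
          · rw [habove]
            exact ⟨(hmemg w).mpr ((hsplit w).mpr (Or.inr (Or.inr hwB2))), hv0B2 w hwB2⟩
          · intro y hy
            rw [habove] at hy
            obtain ⟨hyb, hylt⟩ := hy
            rcases (hsplit y).mp ((hmemg y).mp hyb) with hyB1 | rfl | hyB2
            · exact absurd (hB1v0 y hyB1) (by omega)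
            · omega
            · rcases List.mem_cons.mp hyB2 with rfl | hyB2'
              · omega
              · have := (List.pairwise_cons.mp hpw2).2
                exact le_of_lt ((List.pairwise_cons.mp this).1 y hyB2')
        rw [if_pos h0, hgd]
        simp only [pvSuccC, hmin, Option.map_some]
        rw [hk0]
    · have hB2nil : B2 = [] := by
        rw [← List.length_eq_zero_iff]
        omega
      have hempty : pvAboveOffs coords key p = [] := by
        rw [List.eq_nil_iff_forall_not_mem]
        intro v hv
        rw [habove] at hv
        obtain ⟨hvb, hvlt⟩ := hv
        rcases (hsplit v).mp ((hmemg v).mp hvb) with hvB1 | rfl | hvB2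
        · exact absurd (hB1v0 v hvB1) (by omega)
        · omega
        · rw [hB2nil] at hvB2; cases hvB2
      rw [if_neg h0]
      simp [pvSuccC, hempty]


-- ----- A's per-direction neighbour parts, against the same specification -----

theorem pvDupWitness {α : Type} [BEq α] [LawfulBEq α] (l : List α) (p : α) (d : α) (i : Nat)
    (hi : i < l.length) (hpi : l.getD i d = p) (h : 1 < l.count p) :
    ∃ a, a < l.length ∧ a ≠ i ∧ l.getD a d = p := by
  by_contra hcon
  rw [pvCount_eq l p d] at h
  have hiS : i ∈ (List.range l.length).filter (fun j => l.getD j d == p) :=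
    List.mem_filter.mpr ⟨List.mem_range.mpr hi, by simp only [beq_iff_eq]; exact hpi⟩
  have hall : ∀ a ∈ (List.range l.length).filter (fun j => l.getD j d == p), a = i := by
    intro a ha
    obtain ⟨ha1, ha2⟩ := List.mem_filter.mp ha
    by_contra hne
    exact hcon ⟨a, List.mem_range.mp ha1, hne, by simpa using ha2⟩
  have hnd : ((List.range l.length).filter (fun j => l.getD j d == p)).Nodup :=
    List.Nodup.filter _ List.nodup_range
  rcases hsp : (List.range l.length).filter (fun j => l.getD j d == p) with _ | ⟨x, _ | ⟨y, t⟩⟩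
  · rw [hsp] at h; simp at h
  · rw [hsp] at h; simp at h
  · rw [hsp] at hall hnd
    have hx := hall x List.mem_cons_self
    have hy := hall y (List.mem_cons_of_mem x List.mem_cons_self)
    rw [List.nodup_cons] at hnd
    exact hnd.1 (by rw [hx, hy]; exact List.mem_cons_self)

theorem pvInsertBy_map {α β : Type} (f : β → α) (k1 k2 : α → Int) (x : β) (acc : List β) :
    PySem.List.insertBy (pvBef k1 k2) (f x) (acc.map f)
      = (PySem.List.insertBy (pvBef (fun a => k1 (f a)) (fun a => k2 (f a))) x acc).map f := by
  induction acc with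
  | nil => rfl
  | cons y ys ih =>
    show PySem.List.insertBy (pvBef k1 k2) (f x) (f y :: ys.map f) = _
    have hb : pvBef k1 k2 (f x) (f y) = pvBef (fun a => k1 (f a)) (fun a => k2 (f a)) x y := rfl
    by_cases h : pvBef (fun a => k1 (f a)) (fun a => k2 (f a)) x y
    · simp only [PySem.List.insertBy, hb, h, if_pos]
      simp
    · have hf : pvBef (fun a => k1 (f a)) (fun a => k2 (f a)) x y = false := by simpa using h
      simp only [PySem.List.insertBy, hb, hf, Bool.false_eq_true, if_false]
      simp only [List.map_cons, ih]

theorem pvMapSorted2 {α β : Type} (f : β → α) (k1 k2 : α → Int) (xs : List β) :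
    PySem.List.sorted2 (xs.map f) k1 k2
      = (PySem.List.sorted2 xs (fun a => k1 (f a)) (fun a => k2 (f a))).map f := by
  rw [pvSorted2_eq_foldl, pvSorted2_eq_foldl]
  suffices H : ∀ acc : List β, (xs.map f).foldl (fun acc x => PySem.List.insertBy (pvBef k1 k2) x acc) (acc.map f)
      = (xs.foldl (fun acc x => PySem.List.insertBy (pvBef (fun a => k1 (f a)) (fun a => k2 (f a))) x acc) acc).map f by
    simpa using H []
  induction xs with
  | nil => intro acc; rfl
  | cons x xs ih =>
    intro acc
    simp only [List.map_cons, List.foldl_cons]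
    rw [pvInsertBy_map f k1 k2 x acc]
    exact ih _

theorem pvCoordsEq (coords : List (Int × Int)) :
    coords = (List.range coords.length).map (fun j => coords.getD j (0,0)) := by
  apply List.ext_getElem
  · simp
  · intro j h1 h2
    simp only [List.getElem_map, List.getElem_range, List.getD_eq_getElem?_getD]
    rw [List.getElem?_eq_getElem h1]
    rfl

theorem pvFilterMap {α β : Type} (f : β → α) (p : α → Bool) (l : List β) :
    (l.map f).filter p = (l.filter (fun b => p (f b))).map f := by
  induction l with
  | nil => rfl
  | cons x xs ih =>
    simp only [List.map_cons, List.filter_cons]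
    by_cases h : p (f x)
    · simp [h, ih]
    · simp [h, ih]

theorem pvApredEq (coords : List (Int × Int)) (key unkey : Int → Int → Int × Int)
    (hinv : ∀ p : Int × Int, unkey (key p.1 p.2).1 (key p.1 p.2).2 = p)
    (i : Nat) (L₁ L₂ : List Nat)
    (hperm : (L₁ ++ i :: L₂).Perm (List.range coords.length))
    (hpw : (L₁ ++ i :: L₂).Pairwise (pvS (fun j => (key (coords.getD j (0,0)).1 (coords.getD j (0,0)).2).1)
        (fun j => (key (coords.getD j (0,0)).1 (coords.getD j (0,0)).2).2) id))
    (hone : ∀ a, a < coords.length → coords.getD a (0,0) = coords.getD i (0,0) → a = i) :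
    ((L₁.filter (fun j => decide ((key (coords.getD j (0,0)).1 (coords.getD j (0,0)).2).1
        = (key (coords.getD i (0,0)).1 (coords.getD i (0,0)).2).1))).getLast?).map (fun j => coords.getD j (0,0))
      = pvPredC coords key unkey (coords.getD i (0,0)) := by
  have hkinj : ∀ q r : Int × Int, key q.1 q.2 = key r.1 r.2 → q = r := by
    intro q r h
    rw [← hinv q, ← hinv r, h]
  set n := coords.length with hn
  set C : Nat → Int × Int := fun j => coords.getD j (0,0) with hC
  set P : Nat → Int := fun j => (key (C j).1 (C j).2).1 with hP
  set S : Nat → Int := fun j => (key (C j).1 (C j).2).2 with hS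
  show ((L₁.filter (fun j => decide (P j = P i))).getLast?).map C = pvPredC coords key unkey (C i)
  have hiL : i ∈ L₁ ++ i :: L₂ := by simp
  have hi : i < n := List.mem_range.mp (hperm.mem_iff.mp hiL)
  have hnd : (L₁ ++ i :: L₂).Nodup := hperm.symm.nodup List.nodup_range
  obtain ⟨hpw1, hpw2, hcross⟩ := List.pairwise_append.mp hpw
  have hiL₂ := (List.pairwise_cons.mp hpw2).1
  have hmemn : ∀ j, j ∈ L₁ ++ i :: L₂ ↔ j < n := by
    intro j
    rw [hperm.mem_iff, List.mem_range]
  have hSne : ∀ j, j < n → j ≠ i → P j = P i → S j < S i ∨ S i < S j := by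
    intro j hj hji hPj
    rcases lt_trichotomy (S j) (S i) with h | h | h
    · exact Or.inl h
    · exfalso
      apply hji
      apply hone j hj
      exact hkinj (C j) (C i) (by rw [Prod.ext_iff]; exact ⟨hPj, h⟩)
    · exact Or.inr h
  have hL₁mem : ∀ a, a < n → P a = P i → S a < S i → a ∈ L₁ := by
    intro a ha hPa hSa
    have hane : a ≠ i := by
      intro h
      subst h
      omega
    rcases List.mem_append.mp ((hmemn a).mpr ha) with haL | haL
    · exact haL
    · rcases List.mem_cons.mp haL with rfl | haL₂
      · omega
      · exfalso
        have := hiL₂ a haL₂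
        rcases this with h | ⟨h, h'⟩
        · rw [hPa] at h; omega
        · rcases h' with h' | ⟨h', -⟩
          · omega
          · omega
  have hbelowC : ∀ v, v ∈ pvBelowOffs coords key (C i) ↔ ∃ a, a < n ∧ P a = P i ∧ S a < S i ∧ S a = v := by
    intro v
    simp only [pvBelowOffs, List.mem_map, List.mem_filter, Bool.and_eq_true, beq_iff_eq,
      decide_eq_true_eq, PySem.List.mem_dedup]
    constructor
    · rintro ⟨q, ⟨hq1, hq2, hq3⟩, hq4⟩
      obtain ⟨a, ha, hae⟩ := (pvMemIdx coords q (0,0)).mp hq1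
      refine ⟨a, ha, ?_, ?_, ?_⟩
      · simp only [hP, hC]; rw [hae]; exact hq2
      · simp only [hS, hC]; rw [hae]; exact hq3
      · simp only [hS, hC]; rw [hae]; exact hq4
    · rintro ⟨a, ha, hPa, hSa, hv⟩
      exact ⟨C a, ⟨(pvMemIdx coords (C a) (0,0)).mpr ⟨a, ha, rfl⟩, hPa, hSa⟩, hv⟩
  rcases hF : L₁.filter (fun j => decide (P j = P i)) with _ | ⟨f0, Ft⟩
  · -- no predecessor on the line
    have hempty : pvBelowOffs coords key (C i) = [] := by
      rw [List.eq_nil_iff_forall_not_mem]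
      intro v hv
      obtain ⟨a, ha, hPa, hSa, hv⟩ := (hbelowC v).mp hv
      have haL₁ := hL₁mem a ha hPa hSa
      have : a ∈ L₁.filter (fun j => decide (P j = P i)) :=
        List.mem_filter.mpr ⟨haL₁, by simp [hPa]⟩
      rw [hF] at this
      cases this
    have hmaxnil : PySem.List.max? (pvBelowOffs coords key (C i)) (fun v => v) = none := by
      rw [PySem.List.max?_eq_none_iff]
      exact hempty
    simp [pvPredC, hmaxnil]
  · -- the last line-mate before i
    obtain ⟨M, j0, hMj⟩ := List.eq_nil_or_concat' (f0 :: Ft) |>.resolve_left (by simp)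
    rw [← hF] at hMj
    have hlast : (L₁.filter (fun j => decide (P j = P i))).getLast? = some j0 := by
      rw [hMj]
      simp
    have hj0F : j0 ∈ L₁.filter (fun j => decide (P j = P i)) := by
      rw [hMj]; simp
    have hj0L₁ : j0 ∈ L₁ := (List.mem_filter.mp hj0F).1
    have hPj0 : P j0 = P i := by
      have := (List.mem_filter.mp hj0F).2
      simpa using this
    have hj0n : j0 < n := (hmemn j0).mp (List.mem_append.mpr (Or.inl hj0L₁))
    have hj0i : j0 ≠ i := by
      intro h
      subst h
      exact (List.nodup_append.mp hnd).2.2 j0 hj0L₁ j0 List.mem_cons_self rfl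
    have hSj0 : S j0 < S i := by
      have hS2 := hSne j0 hj0n hj0i hPj0
      rcases hS2 with h | h
      · exact h
      · exfalso
        have := hcross j0 hj0L₁ i List.mem_cons_self
        rcases this with h' | ⟨h', h''⟩
        · rw [hPj0] at h'; omega
        · rcases h'' with h'' | ⟨h'', -⟩
          · omega
          · omega
    have hFpw : (L₁.filter (fun j => decide (P j = P i))).Pairwise (pvS P S id) := hpw1.filter _
    have hmax : PySem.List.max? (pvBelowOffs coords key (C i)) (fun v => v) = some (S j0) := by
      apply pvMax?_eq
      · exact (hbelowC (S j0)).mpr ⟨j0, hj0n, hPj0, hSj0, rfl⟩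
      · intro y hy
        obtain ⟨a, ha, hPa, hSa, hv⟩ := (hbelowC y).mp hy
        have haF : a ∈ L₁.filter (fun j => decide (P j = P i)) :=
          List.mem_filter.mpr ⟨hL₁mem a ha hPa hSa, by simp [hPa]⟩
        rw [hMj] at haF
        rcases List.mem_append.mp haF with haM | haj
        · have := (List.pairwise_append.mp (hMj ▸ hFpw)).2.2
          have hrel := this a haM j0 List.mem_cons_self
          rcases hrel with h | ⟨h, h'⟩
          · rw [hPa, ← hPj0] at h; omega
          · rcases h' with h' | ⟨h', -⟩
            · omega
            · omega
        · have : a = j0 := by simpa using haj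
          subst this
          omega
    rw [← hF, hlast]
    simp only [Option.map_some, pvPredC, hmax]
    have : unkey (key (C i).1 (C i).2).1 (S j0) = C j0 := by
      have h1 := hinv (C j0)
      rw [show (key (C j0).1 (C j0).2).1 = (key (C i).1 (C i).2).1 from hPj0] at h1
      exact h1
    rw [this]

theorem pvAsuccEq (coords : List (Int × Int)) (key unkey : Int → Int → Int × Int)
    (hinv : ∀ p : Int × Int, unkey (key p.1 p.2).1 (key p.1 p.2).2 = p)
    (i : Nat) (L₁ L₂ : List Nat)
    (hperm : (L₁ ++ i :: L₂).Perm (List.range coords.length))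
    (hpw : (L₁ ++ i :: L₂).Pairwise (pvS (fun j => (key (coords.getD j (0,0)).1 (coords.getD j (0,0)).2).1)
        (fun j => (key (coords.getD j (0,0)).1 (coords.getD j (0,0)).2).2) id))
    (hone : ∀ a, a < coords.length → coords.getD a (0,0) = coords.getD i (0,0) → a = i) :
    ((L₂.filter (fun j => decide ((key (coords.getD j (0,0)).1 (coords.getD j (0,0)).2).1
        = (key (coords.getD i (0,0)).1 (coords.getD i (0,0)).2).1))).head?).map (fun j => coords.getD j (0,0))
      = pvSuccC coords key unkey (coords.getD i (0,0)) := by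
  have hkinj : ∀ q r : Int × Int, key q.1 q.2 = key r.1 r.2 → q = r := by
    intro q r h
    rw [← hinv q, ← hinv r, h]
  set n := coords.length with hn
  set C : Nat → Int × Int := fun j => coords.getD j (0,0) with hC
  set P : Nat → Int := fun j => (key (C j).1 (C j).2).1 with hP
  set S : Nat → Int := fun j => (key (C j).1 (C j).2).2 with hS
  show ((L₂.filter (fun j => decide (P j = P i))).head?).map C = pvSuccC coords key unkey (C i)
  have hiL : i ∈ L₁ ++ i :: L₂ := by simp
  have hi : i < n := List.mem_range.mp (hperm.mem_iff.mp hiL)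
  have hnd : (L₁ ++ i :: L₂).Nodup := hperm.symm.nodup List.nodup_range
  obtain ⟨hpw1, hpw2, hcross⟩ := List.pairwise_append.mp hpw
  have hiL₂ := (List.pairwise_cons.mp hpw2).1
  have hL₂pw : L₂.Pairwise (pvS P S id) := (List.pairwise_cons.mp hpw2).2
  have hmemn : ∀ j, j ∈ L₁ ++ i :: L₂ ↔ j < n := by
    intro j
    rw [hperm.mem_iff, List.mem_range]
  have hSne : ∀ j, j < n → j ≠ i → P j = P i → S j < S i ∨ S i < S j := by
    intro j hj hji hPj
    rcases lt_trichotomy (S j) (S i) with h | h | h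
    · exact Or.inl h
    · exfalso
      apply hji
      apply hone j hj
      exact hkinj (C j) (C i) (by rw [Prod.ext_iff]; exact ⟨hPj, h⟩)
    · exact Or.inr h
  have hL₂mem : ∀ a, a < n → P a = P i → S i < S a → a ∈ L₂ := by
    intro a ha hPa hSa
    have hane : a ≠ i := by
      intro h
      subst h
      omega
    rcases List.mem_append.mp ((hmemn a).mpr ha) with haL | haL
    · exfalso
      have := hcross a haL i List.mem_cons_self
      rcases this with h | ⟨h, h'⟩
      · rw [hPa] at h; omega
      · rcases h' with h' | ⟨h', -⟩
        · omega
        · omega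
    · rcases List.mem_cons.mp haL with rfl | haL₂
      · omega
      · exact haL₂
  have haboveC : ∀ v, v ∈ pvAboveOffs coords key (C i) ↔ ∃ a, a < n ∧ P a = P i ∧ S i < S a ∧ S a = v := by
    intro v
    simp only [pvAboveOffs, List.mem_map, List.mem_filter, Bool.and_eq_true, beq_iff_eq,
      decide_eq_true_eq, PySem.List.mem_dedup]
    constructor
    · rintro ⟨q, ⟨hq1, hq2, hq3⟩, hq4⟩
      obtain ⟨a, ha, hae⟩ := (pvMemIdx coords q (0,0)).mp hq1
      refine ⟨a, ha, ?_, ?_, ?_⟩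
      · simp only [hP, hC]; rw [hae]; exact hq2
      · simp only [hS, hC]; rw [hae]; exact hq3
      · simp only [hS, hC]; rw [hae]; exact hq4
    · rintro ⟨a, ha, hPa, hSa, hv⟩
      exact ⟨C a, ⟨(pvMemIdx coords (C a) (0,0)).mpr ⟨a, ha, rfl⟩, hPa, hSa⟩, hv⟩
  rcases hF : L₂.filter (fun j => decide (P j = P i)) with _ | ⟨j0, Ft⟩
  · -- no successor on the line
    have hempty : pvAboveOffs coords key (C i) = [] := by
      rw [List.eq_nil_iff_forall_not_mem]
      intro v hv
      obtain ⟨a, ha, hPa, hSa, hv⟩ := (haboveC v).mp hv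
      have haL₂ := hL₂mem a ha hPa hSa
      have : a ∈ L₂.filter (fun j => decide (P j = P i)) :=
        List.mem_filter.mpr ⟨haL₂, by simp [hPa]⟩
      rw [hF] at this
      cases this
    have hminnil : PySem.List.min? (pvAboveOffs coords key (C i)) (fun v => v) = none := by
      rw [PySem.List.min?_eq_none_iff]
      exact hempty
    simp [pvSuccC, hminnil]
  · -- the first line-mate after i
    have hhead : (L₂.filter (fun j => decide (P j = P i))).head? = some j0 := by
      rw [hF]
      rfl
    have hj0F : j0 ∈ L₂.filter (fun j => decide (P j = P i)) := by
      rw [hF]; exact List.mem_cons_self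
    have hj0L₂ : j0 ∈ L₂ := (List.mem_filter.mp hj0F).1
    have hPj0 : P j0 = P i := by
      have := (List.mem_filter.mp hj0F).2
      simpa using this
    have hj0n : j0 < n := (hmemn j0).mp (by simp [hj0L₂])
    have hj0i : j0 ≠ i := by
      intro h
      subst h
      exact (List.nodup_cons.mp ((List.nodup_append.mp hnd).2.1)).1 hj0L₂
    have hSj0 : S i < S j0 := by
      have hS2 := hSne j0 hj0n hj0i hPj0
      rcases hS2 with h | h
      · exfalso
        have := hiL₂ j0 hj0L₂
        rcases this with h' | ⟨h', h''⟩
        · rw [hPj0] at h'; omega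
        · rcases h'' with h'' | ⟨h'', -⟩
          · omega
          · omega
      · exact h
    have hFpw : (L₂.filter (fun j => decide (P j = P i))).Pairwise (pvS P S id) := hL₂pw.filter _
    have hmin : PySem.List.min? (pvAboveOffs coords key (C i)) (fun v => v) = some (S j0) := by
      apply pvMin?_eq
      · exact (haboveC (S j0)).mpr ⟨j0, hj0n, hPj0, hSj0, rfl⟩
      · intro y hy
        obtain ⟨a, ha, hPa, hSa, hv⟩ := (haboveC y).mp hy
        have haF : a ∈ L₂.filter (fun j => decide (P j = P i)) :=
          List.mem_filter.mpr ⟨hL₂mem a ha hPa hSa, by simp [hPa]⟩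
        rw [hF] at haF
        rcases List.mem_cons.mp haF with rfl | haFt
        · omega
        · have hrel := (List.pairwise_cons.mp (hF ▸ hFpw)).1 a haFt
          rcases hrel with h | ⟨h, h'⟩
          · rw [hPa, ← hPj0] at h; omega
          · rcases h' with h' | ⟨h', -⟩
            · omega
            · omega
    rw [← hF, hhead]
    simp only [Option.map_some, pvSuccC, hmin]
    have : unkey (key (C i).1 (C i).2).1 (S j0) = C j0 := by
      have h1 := hinv (C j0)
      rw [show (key (C j0).1 (C j0).2).1 = (key (C i).1 (C i).2).1 from hPj0] at h1
      exact h1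
    rw [this]

-- duplicated coordinate: each direction list is nonempty, and a singleton
-- neighbour list holds (an instance of) the same coordinate
theorem pvAdup (coords : List (Int × Int)) (key : Int → Int → Int × Int)
    (hkinj : ∀ p q : Int × Int, key p.1 p.2 = key q.1 q.2 → p = q)
    (L₁ L₂ : List Nat) (i : Nat)
    (hperm : (L₁ ++ i :: L₂).Perm (List.range coords.length))
    (hpw : (L₁ ++ i :: L₂).Pairwise (pvS (fun j => (key (coords.getD j (0,0)).1 (coords.getD j (0,0)).2).1)
        (fun j => (key (coords.getD j (0,0)).1 (coords.getD j (0,0)).2).2) id))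
    (a : Nat) (ha : a < coords.length) (hai : a ≠ i) (hca : coords.getD a (0,0) = coords.getD i (0,0)) :
    (¬ ((L₁.filter (fun j => decide ((key (coords.getD j (0,0)).1 (coords.getD j (0,0)).2).1
          = (key (coords.getD i (0,0)).1 (coords.getD i (0,0)).2).1))) = []
        ∧ (L₂.filter (fun j => decide ((key (coords.getD j (0,0)).1 (coords.getD j (0,0)).2).1
          = (key (coords.getD i (0,0)).1 (coords.getD i (0,0)).2).1))) = []))
    ∧ (∀ j, (L₁.filter (fun j => decide ((key (coords.getD j (0,0)).1 (coords.getD j (0,0)).2).1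
          = (key (coords.getD i (0,0)).1 (coords.getD i (0,0)).2).1))).getLast? = some j →
        (L₂.filter (fun j => decide ((key (coords.getD j (0,0)).1 (coords.getD j (0,0)).2).1
          = (key (coords.getD i (0,0)).1 (coords.getD i (0,0)).2).1))) = [] →
        coords.getD j (0,0) = coords.getD i (0,0))
    ∧ (∀ j, (L₁.filter (fun j => decide ((key (coords.getD j (0,0)).1 (coords.getD j (0,0)).2).1
          = (key (coords.getD i (0,0)).1 (coords.getD i (0,0)).2).1))) = [] →
        (L₂.filter (fun j => decide ((key (coords.getD j (0,0)).1 (coords.getD j (0,0)).2).1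
          = (key (coords.getD i (0,0)).1 (coords.getD i (0,0)).2).1))).head? = some j →
        coords.getD j (0,0) = coords.getD i (0,0)) := by
  set n := coords.length with hn
  set C : Nat → Int × Int := fun j => coords.getD j (0,0) with hC
  set P : Nat → Int := fun j => (key (C j).1 (C j).2).1 with hP
  set S : Nat → Int := fun j => (key (C j).1 (C j).2).2 with hS
  show (¬ (L₁.filter (fun j => decide (P j = P i)) = [] ∧ L₂.filter (fun j => decide (P j = P i)) = []))
    ∧ (∀ j, (L₁.filter (fun j => decide (P j = P i))).getLast? = some j →
        L₂.filter (fun j => decide (P j = P i)) = [] → C j = C i)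
    ∧ (∀ j, L₁.filter (fun j => decide (P j = P i)) = [] →
        (L₂.filter (fun j => decide (P j = P i))).head? = some j → C j = C i)
  have hmemn : ∀ j, j ∈ L₁ ++ i :: L₂ ↔ j < n := by
    intro j
    rw [hperm.mem_iff, List.mem_range]
  obtain ⟨hpw1, hpw2, hcross⟩ := List.pairwise_append.mp hpw
  have hiL₂ := (List.pairwise_cons.mp hpw2).1
  have hPa : P a = P i := by
    simp only [hP, hC]
    rw [hca]
  have hSa : S a = S i := by
    simp only [hS, hC]
    rw [hca]
  have haL : a ∈ L₁ ++ i :: L₂ := (hmemn a).mpr ha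
  have haL' : a ∈ L₁ ∨ a ∈ L₂ := by
    rcases List.mem_append.mp haL with h | h
    · exact Or.inl h
    · rcases List.mem_cons.mp h with rfl | h
      · exact absurd rfl hai
      · exact Or.inr h
  have hkeyeq : ∀ j, P j = P i → S j = S i → C j = C i := by
    intro j h1 h2
    apply hkinj
    rw [Prod.ext_iff]
    exact ⟨h1, h2⟩
  refine ⟨?_, ?_, ?_⟩
  · rintro ⟨h1, h2⟩
    rcases haL' with h | h
    · have : a ∈ L₁.filter (fun j => decide (P j = P i)) := List.mem_filter.mpr ⟨h, by simp [hPa]⟩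
      rw [h1] at this
      cases this
    · have : a ∈ L₂.filter (fun j => decide (P j = P i)) := List.mem_filter.mpr ⟨h, by simp [hPa]⟩
      rw [h2] at this
      cases this
  · intro j0 hlast hF2
    have haL₁ : a ∈ L₁ := by
      rcases haL' with h | h
      · exact h
      · exfalso
        have : a ∈ L₂.filter (fun j => decide (P j = P i)) := List.mem_filter.mpr ⟨h, by simp [hPa]⟩
        rw [hF2] at this
        cases this
    have haF : a ∈ L₁.filter (fun j => decide (P j = P i)) := List.mem_filter.mpr ⟨haL₁, by simp [hPa]⟩
    obtain ⟨M, hM⟩ := List.getLast?_eq_some_iff.mp hlast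
    have hj0F : j0 ∈ L₁.filter (fun j => decide (P j = P i)) := by rw [hM]; simp
    have hj0L₁ : j0 ∈ L₁ := (List.mem_filter.mp hj0F).1
    have hPj0 : P j0 = P i := by
      have := (List.mem_filter.mp hj0F).2
      simpa using this
    have hSj0le : S j0 ≤ S i := by
      have := hcross j0 hj0L₁ i List.mem_cons_self
      rcases this with h | ⟨h, h'⟩
      · rw [hPj0] at h; omega
      · rcases h' with h' | ⟨h', -⟩
        · omega
        · omega
    have hFpw : (L₁.filter (fun j => decide (P j = P i))).Pairwise (pvS P S id) := hpw1.filter _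
    rw [hM] at haF
    have hSj0 : S j0 = S i := by
      rcases List.mem_append.mp haF with haM | haj
      · have hrel := (List.pairwise_append.mp (hM ▸ hFpw)).2.2 a haM j0 List.mem_cons_self
        have hSale : S a ≤ S j0 := by
          rcases hrel with h | ⟨h, h'⟩
          · rw [hPa, ← hPj0] at h; omega
          · rcases h' with h' | ⟨h', -⟩
            · omega
            · omega
        omega
      · have : a = j0 := by simpa using haj
        subst this
        omega
    exact hkeyeq j0 hPj0 hSj0
  · intro j0 hF1 hhead
    have haL₂ : a ∈ L₂ := by
      rcases haL' with h | h
      · exfalso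
        have : a ∈ L₁.filter (fun j => decide (P j = P i)) := List.mem_filter.mpr ⟨h, by simp [hPa]⟩
        rw [hF1] at this
        cases this
      · exact h
    have haF : a ∈ L₂.filter (fun j => decide (P j = P i)) := List.mem_filter.mpr ⟨haL₂, by simp [hPa]⟩
    have hj0F : j0 ∈ L₂.filter (fun j => decide (P j = P i)) := by
      rcases hFe : L₂.filter (fun j => decide (P j = P i)) with _ | ⟨x, t⟩
      · rw [hFe] at hhead; cases hhead
      · rw [hFe] at hhead
        have : x = j0 := by simpa using hhead
        subst this
        exact List.mem_cons_self
    have hj0L₂ : j0 ∈ L₂ := (List.mem_filter.mp hj0F).1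
    have hPj0 : P j0 = P i := by
      have := (List.mem_filter.mp hj0F).2
      simpa using this
    have hSj0ge : S i ≤ S j0 := by
      have := hiL₂ j0 hj0L₂
      rcases this with h | ⟨h, h'⟩
      · rw [hPj0] at h; omega
      · rcases h' with h' | ⟨h', -⟩
        · omega
        · omega
    have hFpw : (L₂.filter (fun j => decide (P j = P i))).Pairwise (pvS P S id) :=
      ((List.pairwise_cons.mp hpw2).2).filter _
    have hSj0 : S j0 = S i := by
      rcases hFe : L₂.filter (fun j => decide (P j = P i)) with _ | ⟨x, t⟩
      · rw [hFe] at haF; cases haF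
      · rw [hFe] at hhead
        have hxj : x = j0 := by simpa using hhead
        subst hxj
        rw [hFe] at haF
        rcases List.mem_cons.mp haF with rfl | hat
        · omega
        · have hrel := (List.pairwise_cons.mp (hFe ▸ hFpw)).1 a hat
          have : S x ≤ S a := by
            rcases hrel with h | ⟨h, h'⟩
            · rw [hPa] at h
              rw [hPj0] at h
              omega
            · rcases h' with h' | ⟨h', -⟩
              · omega
              · omega
          omega
    exact hkeyeq j0 hPj0 hSj0


-- the four direction key/unkey pairs and their inverse laws
theorem pvKu1 : ∀ k s : Int, ((fun x y : Int => (x, y)) ((fun k s : Int => (k, s)) k s).1 ((fun k s : Int => (k, s)) k s).2) = (k, s) := fun _ _ => rfl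
theorem pvKu2 : ∀ k s : Int, ((fun x y : Int => (y, x)) ((fun k s : Int => (s, k)) k s).1 ((fun k s : Int => (s, k)) k s).2) = (k, s) := fun _ _ => rfl
theorem pvKu3 : ∀ k s : Int, ((fun x y : Int => (x + y, x)) ((fun k s : Int => (s, k - s)) k s).1 ((fun k s : Int => (s, k - s)) k s).2) = (k, s) := by
  intro k s
  show (s + (k - s), s) = (k, s)
  rw [Prod.mk.injEq]
  exact ⟨by ring, rfl⟩
theorem pvKu4 : ∀ k s : Int, ((fun x y : Int => (y - x, x)) ((fun k s : Int => (s, k + s)) k s).1 ((fun k s : Int => (s, k + s)) k s).2) = (k, s) := by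
  intro k s
  show (k + s - s, s) = (k, s)
  rw [Prod.mk.injEq]
  exact ⟨by ring, rfl⟩
theorem pvInv1 : ∀ p : Int × Int, ((fun k s : Int => (k, s)) ((fun x y : Int => (x, y)) p.1 p.2).1 ((fun x y : Int => (x, y)) p.1 p.2).2) = p := fun _ => rfl
theorem pvInv2 : ∀ p : Int × Int, ((fun k s : Int => (s, k)) ((fun x y : Int => (y, x)) p.1 p.2).1 ((fun x y : Int => (y, x)) p.1 p.2).2) = p := fun _ => rfl
theorem pvInv3 : ∀ p : Int × Int, ((fun k s : Int => (s, k - s)) ((fun x y : Int => (x + y, x)) p.1 p.2).1 ((fun x y : Int => (x + y, x)) p.1 p.2).2) = p := by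
  intro p
  show (p.1, p.1 + p.2 - p.1) = p
  rw [Prod.ext_iff]
  exact ⟨rfl, by ring⟩
theorem pvInv4 : ∀ p : Int × Int, ((fun k s : Int => (s, k + s)) ((fun x y : Int => (y - x, x)) p.1 p.2).1 ((fun x y : Int => (y - x, x)) p.1 p.2).2) = p := by
  intro p
  show (p.1, p.2 - p.1 + p.1) = p
  rw [Prod.ext_iff]
  exact ⟨rfl, by ring⟩

theorem pvPartsLen (F1 F2 : List Nat) (h : ¬ (F1 = [] ∧ F2 = [])) :
    1 ≤ ((F1.getLast?).toList ++ (F2.head?).toList).length := by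
  rcases F1 with _ | ⟨x, t⟩
  · rcases F2 with _ | ⟨y, s⟩
    · exact absurd ⟨rfl, rfl⟩ h
    · simp
  · obtain ⟨M, z, hMz⟩ := (List.eq_nil_or_concat' (x :: t)).resolve_left (by simp)
    rw [hMz]
    simp

theorem pvOptLen {α β : Type} (f : α → β) (o : Option α) (o' : Option β) (h : o.map f = o') :
    o.toList.length = if o'.isSome then 1 else 0 := by
  subst h
  cases o <;> simp

theorem pvMarkEq (coords : List (Int × Int)) (L1 L2 L3 L4 : List Nat)
    (hp1 : L1.Perm (List.range coords.length)) (hp2 : L2.Perm (List.range coords.length))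
    (hp3 : L3.Perm (List.range coords.length)) (hp4 : L4.Perm (List.range coords.length))
    (hw1 : L1.Pairwise (pvS (fun t => (coords.getD t (0,0)).1) (fun t => (coords.getD t (0,0)).2) id))
    (hw2 : L2.Pairwise (pvS (fun t => (coords.getD t (0,0)).2) (fun t => (coords.getD t (0,0)).1) id))
    (hw3 : L3.Pairwise (pvS (fun t => (coords.getD t (0,0)).1 + (coords.getD t (0,0)).2) (fun t => (coords.getD t (0,0)).1) id))
    (hw4 : L4.Pairwise (pvS (fun t => (coords.getD t (0,0)).2 - (coords.getD t (0,0)).1) (fun t => (coords.getD t (0,0)).1) id))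
    (j : Nat) (hj : j < coords.length) :
    pvMarkA coords L1 L2 L3 L4 j
      = pvMarked (PySem.Dict.counter coords)
          (pvSteps (PySem.Dict.counter coords) (fun x y => (x, y)) (fun k s => (k, s)))
          (pvSteps (PySem.Dict.counter coords) (fun x y => (y, x)) (fun k s => (s, k)))
          (pvSteps (PySem.Dict.counter coords) (fun x y => (x + y, x)) (fun k s => (s, k - s)))
          (pvSteps (PySem.Dict.counter coords) (fun x y => (y - x, x)) (fun k s => (s, k + s)))
          (coords.getD j (0,0)) := by
  rw [pvMarkA, pvMarked]
  have hjm : coords.getD j (0,0) ∈ coords := by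
    rw [List.getD_eq_getElem coords (0,0) hj]
    exact List.getElem_mem _
  obtain ⟨A1, B1, hd1⟩ := List.mem_iff_append.mp (hp1.mem_iff.mpr (List.mem_range.mpr hj))
  obtain ⟨A2, B2, hd2⟩ := List.mem_iff_append.mp (hp2.mem_iff.mpr (List.mem_range.mpr hj))
  obtain ⟨A3, B3, hd3⟩ := List.mem_iff_append.mp (hp3.mem_iff.mpr (List.mem_range.mpr hj))
  obtain ⟨A4, B4, hd4⟩ := List.mem_iff_append.mp (hp4.mem_iff.mpr (List.mem_range.mpr hj))
  have hnd1 : (A1 ++ j :: B1).Nodup := by rw [← hd1]; exact hp1.symm.nodup List.nodup_range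
  have hnd2 : (A2 ++ j :: B2).Nodup := by rw [← hd2]; exact hp2.symm.nodup List.nodup_range
  have hnd3 : (A3 ++ j :: B3).Nodup := by rw [← hd3]; exact hp3.symm.nodup List.nodup_range
  have hnd4 : (A4 ++ j :: B4).Nodup := by rw [← hd4]; exact hp4.symm.nodup List.nodup_range
  have hni1 : j ∉ A1 := fun h => (List.nodup_append.mp hnd1).2.2 j h j List.mem_cons_self rfl
  have hni2 : j ∉ A2 := fun h => (List.nodup_append.mp hnd2).2.2 j h j List.mem_cons_self rfl
  have hni3 : j ∉ A3 := fun h => (List.nodup_append.mp hnd3).2.2 j h j List.mem_cons_self rfl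
  have hni4 : j ∉ A4 := fun h => (List.nodup_append.mp hnd4).2.2 j h j List.mem_cons_self rfl
  rw [hd1] at hw1 hp1 ⊢
  rw [hd2] at hw2 hp2 ⊢
  rw [hd3] at hw3 hp3 ⊢
  rw [hd4] at hw4 hp4 ⊢
  rw [pvNbrA_eq _ (fun t => (coords.getD t (0,0)).2) A1 B1 j hw1 hni1,
      pvNbrA_eq _ (fun t => (coords.getD t (0,0)).1) A2 B2 j hw2 hni2,
      pvNbrA_eq _ (fun t => (coords.getD t (0,0)).1) A3 B3 j hw3 hni3,
      pvNbrA_eq _ (fun t => (coords.getD t (0,0)).1) A4 B4 j hw4 hni4]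
  rw [PySem.Dict.getD_counter]
  by_cases hdup : 1 < coords.count (coords.getD j (0,0))
  · rw [if_pos (by exact_mod_cast hdup)]
    obtain ⟨a, ha, hai, hca⟩ := pvDupWitness coords (coords.getD j (0,0)) (0,0) j hj rfl hdup
    have h1 := (pvAdup coords (fun x y => (x, y)) (fun p q h => by
        have := pvInv1 p; have := pvInv1 q
        rw [← pvInv1 p, ← pvInv1 q, h]) A1 B1 j hp1 hw1 a ha hai hca).1
    have h2 := (pvAdup coords (fun x y => (y, x)) (fun p q h => by
        rw [← pvInv2 p, ← pvInv2 q, h]) A2 B2 j hp2 hw2 a ha hai hca).1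
    have h3 := (pvAdup coords (fun x y => (x + y, x)) (fun p q h => by
        rw [← pvInv3 p, ← pvInv3 q, h]) A3 B3 j hp3 hw3 a ha hai hca).1
    have h4 := (pvAdup coords (fun x y => (y - x, x)) (fun p q h => by
        rw [← pvInv4 p, ← pvInv4 q, h]) A4 B4 j hp4 hw4 a ha hai hca).1
    have hl1 := pvPartsLen _ _ h1
    have hl2 := pvPartsLen _ _ h2
    have hl3 := pvPartsLen _ _ h3
    have hl4 := pvPartsLen _ _ h4
    simp only [List.length_append] at hl1 hl2 hl3 hl4 ⊢
    rw [beq_eq_false_iff_ne]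
    omega
  · rw [if_neg (by exact_mod_cast hdup)]
    have hone : ∀ a, a < coords.length → coords.getD a (0,0) = coords.getD j (0,0) → a = j := by
      intro a ha hc
      exact pvUniqueIdx coords (coords.getD j (0,0)) (0,0) (Nat.not_lt.mp hdup) a j ha hj hc rfl
    have hm1p : ((A1.filter (fun t => decide ((coords.getD t (0,0)).1 = (coords.getD j (0,0)).1))).getLast?).map (fun t => coords.getD t (0,0))
        = pvPredC coords (fun x y => (x, y)) (fun k s => (k, s)) (coords.getD j (0,0)) :=
      pvApredEq coords (fun x y => (x, y)) (fun k s => (k, s)) pvInv1 j A1 B1 hp1 hw1 hone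
    have hm1s : ((B1.filter (fun t => decide ((coords.getD t (0,0)).1 = (coords.getD j (0,0)).1))).head?).map (fun t => coords.getD t (0,0))
        = pvSuccC coords (fun x y => (x, y)) (fun k s => (k, s)) (coords.getD j (0,0)) :=
      pvAsuccEq coords (fun x y => (x, y)) (fun k s => (k, s)) pvInv1 j A1 B1 hp1 hw1 hone
    have hm2p : ((A2.filter (fun t => decide ((coords.getD t (0,0)).2 = (coords.getD j (0,0)).2))).getLast?).map (fun t => coords.getD t (0,0))
        = pvPredC coords (fun x y => (y, x)) (fun k s => (s, k)) (coords.getD j (0,0)) :=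
      pvApredEq coords (fun x y => (y, x)) (fun k s => (s, k)) pvInv2 j A2 B2 hp2 hw2 hone
    have hm2s : ((B2.filter (fun t => decide ((coords.getD t (0,0)).2 = (coords.getD j (0,0)).2))).head?).map (fun t => coords.getD t (0,0))
        = pvSuccC coords (fun x y => (y, x)) (fun k s => (s, k)) (coords.getD j (0,0)) :=
      pvAsuccEq coords (fun x y => (y, x)) (fun k s => (s, k)) pvInv2 j A2 B2 hp2 hw2 hone
    have hm3p : ((A3.filter (fun t => decide ((coords.getD t (0,0)).1 + (coords.getD t (0,0)).2 = (coords.getD j (0,0)).1 + (coords.getD j (0,0)).2))).getLast?).map (fun t => coords.getD t (0,0))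
        = pvPredC coords (fun x y => (x + y, x)) (fun k s => (s, k - s)) (coords.getD j (0,0)) :=
      pvApredEq coords (fun x y => (x + y, x)) (fun k s => (s, k - s)) pvInv3 j A3 B3 hp3 hw3 hone
    have hm3s : ((B3.filter (fun t => decide ((coords.getD t (0,0)).1 + (coords.getD t (0,0)).2 = (coords.getD j (0,0)).1 + (coords.getD j (0,0)).2))).head?).map (fun t => coords.getD t (0,0))
        = pvSuccC coords (fun x y => (x + y, x)) (fun k s => (s, k - s)) (coords.getD j (0,0)) :=
      pvAsuccEq coords (fun x y => (x + y, x)) (fun k s => (s, k - s)) pvInv3 j A3 B3 hp3 hw3 hone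
    have hm4p : ((A4.filter (fun t => decide ((coords.getD t (0,0)).2 - (coords.getD t (0,0)).1 = (coords.getD j (0,0)).2 - (coords.getD j (0,0)).1))).getLast?).map (fun t => coords.getD t (0,0))
        = pvPredC coords (fun x y => (y - x, x)) (fun k s => (s, k + s)) (coords.getD j (0,0)) :=
      pvApredEq coords (fun x y => (y - x, x)) (fun k s => (s, k + s)) pvInv4 j A4 B4 hp4 hw4 hone
    have hm4s : ((B4.filter (fun t => decide ((coords.getD t (0,0)).2 - (coords.getD t (0,0)).1 = (coords.getD j (0,0)).2 - (coords.getD j (0,0)).1))).head?).map (fun t => coords.getD t (0,0))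
        = pvSuccC coords (fun x y => (y - x, x)) (fun k s => (s, k + s)) (coords.getD j (0,0)) :=
      pvAsuccEq coords (fun x y => (y - x, x)) (fun k s => (s, k + s)) pvInv4 j A4 B4 hp4 hw4 hone
    rw [pvSteps_getD coords (fun x y => (x, y)) (fun k s => (k, s)) pvKu1 pvInv1 _ hjm,
        pvSteps_getD coords (fun x y => (y, x)) (fun k s => (s, k)) pvKu2 pvInv2 _ hjm,
        pvSteps_getD coords (fun x y => (x + y, x)) (fun k s => (s, k - s)) pvKu3 pvInv3 _ hjm,
        pvSteps_getD coords (fun x y => (y - x, x)) (fun k s => (s, k + s)) pvKu4 pvInv4 _ hjm]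
    simp only [List.length_append,
      pvOptLen _ _ _ hm1p, pvOptLen _ _ _ hm1s, pvOptLen _ _ _ hm2p, pvOptLen _ _ _ hm2s,
      pvOptLen _ _ _ hm3p, pvOptLen _ _ _ hm3s, pvOptLen _ _ _ hm4p, pvOptLen _ _ _ hm4s]
    generalize (pvPredC coords (fun x y => (x, y)) (fun k s => (k, s)) (coords.getD j (0,0))).isSome = b1
    generalize (pvSuccC coords (fun x y => (x, y)) (fun k s => (k, s)) (coords.getD j (0,0))).isSome = b2
    generalize (pvPredC coords (fun x y => (y, x)) (fun k s => (s, k)) (coords.getD j (0,0))).isSome = b3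
    generalize (pvSuccC coords (fun x y => (y, x)) (fun k s => (s, k)) (coords.getD j (0,0))).isSome = b4
    generalize (pvPredC coords (fun x y => (x + y, x)) (fun k s => (s, k - s)) (coords.getD j (0,0))).isSome = b5
    generalize (pvSuccC coords (fun x y => (x + y, x)) (fun k s => (s, k - s)) (coords.getD j (0,0))).isSome = b6
    generalize (pvPredC coords (fun x y => (y - x, x)) (fun k s => (s, k + s)) (coords.getD j (0,0))).isSome = b7
    generalize (pvSuccC coords (fun x y => (y - x, x)) (fun k s => (s, k + s)) (coords.getD j (0,0))).isSome = b8
    revert b1 b2 b3 b4 b5 b6 b7 b8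
    decide

-- one direction of the doomed test, A's guard against Source B's alive, given the
-- per-direction neighbour options and the mark agreement on them
theorem pvAliveCase (C : Nat → Int × Int) (markA : Nat → Bool) (markB : (Int × Int) → Bool)
    (nbr : PySem.Dict (Int × Int) (Option (Int × Int) × Option (Int × Int))) (p : Int × Int)
    (F1 F2 : Option Nat)
    (hB : nbr.getD p (none, none) = (F1.map C, F2.map C))
    (hm : ∀ t, F1 = some t ∨ F2 = some t → markA t = markB (C t)) :
    (!(pvSkipA markA (F1.toList ++ F2.toList))) = pvAlive markB nbr p := by
  rcases F1 with _ | t1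
  · rcases F2 with _ | t2
    · simp [pvSkipA, pvAlive, hB]
    · simp [pvSkipA, pvAlive, hB, hm t2 (Or.inr rfl)]
  · rcases F2 with _ | t2
    · simp [pvSkipA, pvAlive, hB, hm t1 (Or.inl rfl)]
    · simp [pvSkipA, pvAlive, hB]

theorem pvSkipFalse (mark : Nat → Bool) (l1 l2 : List Nat)
    (hne : ¬ (l1 = [] ∧ l2 = []))
    (hm1 : ∀ t, l1.getLast? = some t → l2 = [] → mark t = false)
    (hm2 : ∀ t, l1 = [] → l2.head? = some t → mark t = false) :
    pvSkipA mark ((l1.getLast?).toList ++ (l2.head?).toList) = false := by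
  rcases ho1 : l1.getLast? with _ | t1
  · rcases ho2 : l2.head? with _ | t2
    · exact absurd ⟨List.getLast?_eq_none_iff.mp ho1, List.head?_eq_none_iff.mp ho2⟩ hne
    · simp [pvSkipA, hm2 t2 (List.getLast?_eq_none_iff.mp ho1) ho2]
  · rcases ho2 : l2.head? with _ | t2
    · simp [pvSkipA, hm1 t1 ho1 (List.head?_eq_none_iff.mp ho2)]
    · simp [pvSkipA]

theorem pvMain (coords : List (Int × Int)) : doomed_gambit coords = doomed_gambit_alt coords := by
  simp only [doomed_gambit, doomed_gambit_alt]
  rw [PySem.Dict.foldl_insert_getD_add_one_eq_counter]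
  set n := coords.length with hn
  set L1 := PySem.List.sorted2 (List.range n) (fun i => (coords.getD i (0, 0)).1) (fun i => (coords.getD i (0, 0)).2) with hL1
  set L2 := PySem.List.sorted2 L1 (fun i => (coords.getD i (0, 0)).2) (fun i => (coords.getD i (0, 0)).1) with hL2
  set L3 := PySem.List.sorted2 L2 (fun i => (coords.getD i (0, 0)).1 + (coords.getD i (0, 0)).2) (fun i => (coords.getD i (0, 0)).1) with hL3
  set L4 := PySem.List.sorted2 L3 (fun i => (coords.getD i (0, 0)).2 - (coords.getD i (0, 0)).1) (fun i => (coords.getD i (0, 0)).1) with hL4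
  have hp1 : L1.Perm (List.range n) := PySem.List.sorted2_perm _ _ _ _
  have hp2 : L2.Perm (List.range n) := (PySem.List.sorted2_perm _ _ _ _).trans hp1
  have hp3 : L3.Perm (List.range n) := (PySem.List.sorted2_perm _ _ _ _).trans hp2
  have hp4 : L4.Perm (List.range n) := (PySem.List.sorted2_perm _ _ _ _).trans hp3
  have hw1 : L1.Pairwise (pvS (fun i => (coords.getD i (0, 0)).1) (fun i => (coords.getD i (0, 0)).2) id) := pvBase _ _ n
  have hw2 : L2.Pairwise (pvS (fun i => (coords.getD i (0, 0)).2) (fun i => (coords.getD i (0, 0)).1) id) :=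
    pvChain _ _ _ _ L1 hw1 (fun a b h1 h2 => ⟨h2, h1⟩)
  have hw3 : L3.Pairwise (pvS (fun i => (coords.getD i (0, 0)).1 + (coords.getD i (0, 0)).2) (fun i => (coords.getD i (0, 0)).1) id) :=
    pvChain (fun i => (coords.getD i (0, 0)).2) (fun i => (coords.getD i (0, 0)).1) _ _ L2 hw2
      (fun a b h1 h2 => ⟨by beta_reduce at h1 h2 ⊢; omega, h2⟩)
  have hw4 : L4.Pairwise (pvS (fun i => (coords.getD i (0, 0)).2 - (coords.getD i (0, 0)).1) (fun i => (coords.getD i (0, 0)).1) id) :=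
    pvChain (fun i => (coords.getD i (0, 0)).1 + (coords.getD i (0, 0)).2) (fun i => (coords.getD i (0, 0)).1) _ _ L3 hw3
      (fun a b h1 h2 => ⟨by beta_reduce at h1 h2 ⊢; omega, h2⟩)
  have hwO : (PySem.List.sorted2 (List.range n) (fun i => (coords.getD i (0, 0)).2 - (coords.getD i (0, 0)).1) (fun i => (coords.getD i (0, 0)).1)).Pairwise
      (pvS (fun i => (coords.getD i (0, 0)).2 - (coords.getD i (0, 0)).1) (fun i => (coords.getD i (0, 0)).1) id) := pvBase _ _ n
  have hLO : L4 = PySem.List.sorted2 (List.range n) (fun i => (coords.getD i (0, 0)).2 - (coords.getD i (0, 0)).1) (fun i => (coords.getD i (0, 0)).1) :=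
    pvSorted_unique _ _ id _ _ (hp4.trans (PySem.List.sorted2_perm _ _ _ _).symm) hw4 hwO
  have hout : PySem.List.sorted2 coords (fun p => p.2 - p.1) (fun p => p.1)
      = List.map (fun j => coords.getD j (0, 0)) L4 := by
    conv_lhs => rw [pvCoordsEq coords]
    rw [pvMapSorted2 (fun j => coords.getD j (0, 0)) (fun p => p.2 - p.1) (fun p => p.1) (List.range coords.length)]
    exact congrArg _ hLO.symm
  rw [hout, pvFilterMap]
  rw [show (fun i => ((coords.getD i (0, 0)).1, (coords.getD i (0, 0)).2)) = (fun j : Nat => coords.getD j (0, 0)) from rfl]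
  congr 1
  apply List.filter_congr
  intro i hiL4
  have hi : i < n := List.mem_range.mp (hp4.mem_iff.mp hiL4)
  have hCmem : coords.getD i (0, 0) ∈ coords := by
    rw [List.getD_eq_getElem coords (0, 0) hi]
    exact List.getElem_mem _
  obtain ⟨A1, B1, hd1⟩ := List.mem_iff_append.mp (hp1.mem_iff.mpr (List.mem_range.mpr hi))
  rw [hd1] at hw1 hp1 ⊢
  have hnd1 : (A1 ++ i :: B1).Nodup := hp1.symm.nodup List.nodup_range
  have hni1 : i ∉ A1 := fun h => (List.nodup_append.mp hnd1).2.2 i h i List.mem_cons_self rfl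
  have hmemn1 : ∀ t, t ∈ A1 ++ i :: B1 → t < n := fun t ht => List.mem_range.mp (hp1.mem_iff.mp ht)
  obtain ⟨A2, B2, hd2⟩ := List.mem_iff_append.mp (hp2.mem_iff.mpr (List.mem_range.mpr hi))
  rw [hd2] at hw2 hp2 ⊢
  have hnd2 : (A2 ++ i :: B2).Nodup := hp2.symm.nodup List.nodup_range
  have hni2 : i ∉ A2 := fun h => (List.nodup_append.mp hnd2).2.2 i h i List.mem_cons_self rfl
  have hmemn2 : ∀ t, t ∈ A2 ++ i :: B2 → t < n := fun t ht => List.mem_range.mp (hp2.mem_iff.mp ht)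
  obtain ⟨A3, B3, hd3⟩ := List.mem_iff_append.mp (hp3.mem_iff.mpr (List.mem_range.mpr hi))
  rw [hd3] at hw3 hp3 ⊢
  have hnd3 : (A3 ++ i :: B3).Nodup := hp3.symm.nodup List.nodup_range
  have hni3 : i ∉ A3 := fun h => (List.nodup_append.mp hnd3).2.2 i h i List.mem_cons_self rfl
  have hmemn3 : ∀ t, t ∈ A3 ++ i :: B3 → t < n := fun t ht => List.mem_range.mp (hp3.mem_iff.mp ht)
  obtain ⟨A4, B4, hd4⟩ := List.mem_iff_append.mp (hp4.mem_iff.mpr (List.mem_range.mpr hi))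
  rw [hd4] at hw4 hp4 ⊢
  have hnd4 : (A4 ++ i :: B4).Nodup := hp4.symm.nodup List.nodup_range
  have hni4 : i ∉ A4 := fun h => (List.nodup_append.mp hnd4).2.2 i h i List.mem_cons_self rfl
  have hmemn4 : ∀ t, t ∈ A4 ++ i :: B4 → t < n := fun t ht => List.mem_range.mp (hp4.mem_iff.mp ht)
  rw [pvNbrA_eq _ (fun t => (coords.getD t (0,0)).2) A1 B1 i hw1 hni1,
      pvNbrA_eq _ (fun t => (coords.getD t (0,0)).1) A2 B2 i hw2 hni2,
      pvNbrA_eq _ (fun t => (coords.getD t (0,0)).1) A3 B3 i hw3 hni3,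
      pvNbrA_eq _ (fun t => (coords.getD t (0,0)).1) A4 B4 i hw4 hni4]
  rw [PySem.Dict.getD_counter]
  by_cases hdup : 1 < coords.count (coords.getD i (0,0))
  · -- a repeated coordinate: both sides keep it
    obtain ⟨a, ha, hai, hca⟩ := pvDupWitness coords (coords.getD i (0,0)) (0,0) i hi rfl hdup
    have had1 := pvAdup coords (fun x y => (x, y)) (fun p q h => by rw [← pvInv1 p, ← pvInv1 q, h]) A1 B1 i hp1 hw1 a ha hai hca
    have hskip1 : pvSkipA (pvMarkA coords (A1 ++ i :: B1) (A2 ++ i :: B2) (A3 ++ i :: B3) (A4 ++ i :: B4)) (((A1.filter (fun t => decide ((coords.getD t (0,0)).1 = (coords.getD i (0,0)).1))).getLast?).toList ++ ((B1.filter (fun t => decide ((coords.getD t (0,0)).1 = (coords.getD i (0,0)).1))).head?).toList) = false := by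
      apply pvSkipFalse
      · exact had1.1
      · intro t h1 h2
        have htF := List.mem_of_getLast? h1
        have htn : t < n := hmemn1 t (List.mem_append_left _ (List.mem_filter.mp htF).1)
        have hct := had1.2.1 t h1 h2
        rw [pvMarkEq coords _ _ _ _ hp1 hp2 hp3 hp4 hw1 hw2 hw3 hw4 t htn, hct]
        simp only [pvMarked, PySem.Dict.getD_counter]
        rw [if_pos (by exact_mod_cast hdup)]
      · intro t h1 h2
        have htF := List.mem_of_mem_head? h2
        have htn : t < n := hmemn1 t (List.mem_append_right _ (List.mem_cons_of_mem _ (List.mem_filter.mp htF).1))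
        have hct := had1.2.2 t h1 h2
        rw [pvMarkEq coords _ _ _ _ hp1 hp2 hp3 hp4 hw1 hw2 hw3 hw4 t htn, hct]
        simp only [pvMarked, PySem.Dict.getD_counter]
        rw [if_pos (by exact_mod_cast hdup)]
    have had2 := pvAdup coords (fun x y => (y, x)) (fun p q h => by rw [← pvInv2 p, ← pvInv2 q, h]) A2 B2 i hp2 hw2 a ha hai hca
    have hskip2 : pvSkipA (pvMarkA coords (A1 ++ i :: B1) (A2 ++ i :: B2) (A3 ++ i :: B3) (A4 ++ i :: B4)) (((A2.filter (fun t => decide ((coords.getD t (0,0)).2 = (coords.getD i (0,0)).2))).getLast?).toList ++ ((B2.filter (fun t => decide ((coords.getD t (0,0)).2 = (coords.getD i (0,0)).2))).head?).toList) = false := by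
      apply pvSkipFalse
      · exact had2.1
      · intro t h1 h2
        have htF := List.mem_of_getLast? h1
        have htn : t < n := hmemn2 t (List.mem_append_left _ (List.mem_filter.mp htF).1)
        have hct := had2.2.1 t h1 h2
        rw [pvMarkEq coords _ _ _ _ hp1 hp2 hp3 hp4 hw1 hw2 hw3 hw4 t htn, hct]
        simp only [pvMarked, PySem.Dict.getD_counter]
        rw [if_pos (by exact_mod_cast hdup)]
      · intro t h1 h2
        have htF := List.mem_of_mem_head? h2
        have htn : t < n := hmemn2 t (List.mem_append_right _ (List.mem_cons_of_mem _ (List.mem_filter.mp htF).1))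
        have hct := had2.2.2 t h1 h2
        rw [pvMarkEq coords _ _ _ _ hp1 hp2 hp3 hp4 hw1 hw2 hw3 hw4 t htn, hct]
        simp only [pvMarked, PySem.Dict.getD_counter]
        rw [if_pos (by exact_mod_cast hdup)]
    have had3 := pvAdup coords (fun x y => (x + y, x)) (fun p q h => by rw [← pvInv3 p, ← pvInv3 q, h]) A3 B3 i hp3 hw3 a ha hai hca
    have hskip3 : pvSkipA (pvMarkA coords (A1 ++ i :: B1) (A2 ++ i :: B2) (A3 ++ i :: B3) (A4 ++ i :: B4)) (((A3.filter (fun t => decide ((coords.getD t (0,0)).1 + (coords.getD t (0,0)).2 = (coords.getD i (0,0)).1 + (coords.getD i (0,0)).2))).getLast?).toList ++ ((B3.filter (fun t => decide ((coords.getD t (0,0)).1 + (coords.getD t (0,0)).2 = (coords.getD i (0,0)).1 + (coords.getD i (0,0)).2))).head?).toList) = false := by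
      apply pvSkipFalse
      · exact had3.1
      · intro t h1 h2
        have htF := List.mem_of_getLast? h1
        have htn : t < n := hmemn3 t (List.mem_append_left _ (List.mem_filter.mp htF).1)
        have hct := had3.2.1 t h1 h2
        rw [pvMarkEq coords _ _ _ _ hp1 hp2 hp3 hp4 hw1 hw2 hw3 hw4 t htn, hct]
        simp only [pvMarked, PySem.Dict.getD_counter]
        rw [if_pos (by exact_mod_cast hdup)]
      · intro t h1 h2
        have htF := List.mem_of_mem_head? h2
        have htn : t < n := hmemn3 t (List.mem_append_right _ (List.mem_cons_of_mem _ (List.mem_filter.mp htF).1))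
        have hct := had3.2.2 t h1 h2
        rw [pvMarkEq coords _ _ _ _ hp1 hp2 hp3 hp4 hw1 hw2 hw3 hw4 t htn, hct]
        simp only [pvMarked, PySem.Dict.getD_counter]
        rw [if_pos (by exact_mod_cast hdup)]
    have had4 := pvAdup coords (fun x y => (y - x, x)) (fun p q h => by rw [← pvInv4 p, ← pvInv4 q, h]) A4 B4 i hp4 hw4 a ha hai hca
    have hskip4 : pvSkipA (pvMarkA coords (A1 ++ i :: B1) (A2 ++ i :: B2) (A3 ++ i :: B3) (A4 ++ i :: B4)) (((A4.filter (fun t => decide ((coords.getD t (0,0)).2 - (coords.getD t (0,0)).1 = (coords.getD i (0,0)).2 - (coords.getD i (0,0)).1))).getLast?).toList ++ ((B4.filter (fun t => decide ((coords.getD t (0,0)).2 - (coords.getD t (0,0)).1 = (coords.getD i (0,0)).2 - (coords.getD i (0,0)).1))).head?).toList) = false := by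
      apply pvSkipFalse
      · exact had4.1
      · intro t h1 h2
        have htF := List.mem_of_getLast? h1
        have htn : t < n := hmemn4 t (List.mem_append_left _ (List.mem_filter.mp htF).1)
        have hct := had4.2.1 t h1 h2
        rw [pvMarkEq coords _ _ _ _ hp1 hp2 hp3 hp4 hw1 hw2 hw3 hw4 t htn, hct]
        simp only [pvMarked, PySem.Dict.getD_counter]
        rw [if_pos (by exact_mod_cast hdup)]
      · intro t h1 h2
        have htF := List.mem_of_mem_head? h2
        have htn : t < n := hmemn4 t (List.mem_append_right _ (List.mem_cons_of_mem _ (List.mem_filter.mp htF).1))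
        have hct := had4.2.2 t h1 h2
        rw [pvMarkEq coords _ _ _ _ hp1 hp2 hp3 hp4 hw1 hw2 hw3 hw4 t htn, hct]
        simp only [pvMarked, PySem.Dict.getD_counter]
        rw [if_pos (by exact_mod_cast hdup)]
    rw [hskip1, hskip2, hskip3, hskip4]
    have hdect : decide (((coords.count (coords.getD i (0,0)) : Int)) > 1) = true := by
      simp only [decide_eq_true_eq]
      exact_mod_cast hdup
    rw [hdect]
    simp
  · -- a unique coordinate: the four guards agree pointwise
    have hone : ∀ b, b < coords.length → coords.getD b (0,0) = coords.getD i (0,0) → b = i := by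
      intro b hb hc
      exact pvUniqueIdx coords (coords.getD i (0,0)) (0,0) (Nat.not_lt.mp hdup) b i hb hi hc rfl
    have hm1p : ((A1.filter (fun t => decide ((coords.getD t (0,0)).1 = (coords.getD i (0,0)).1))).getLast?).map (fun t => coords.getD t (0,0))
        = pvPredC coords (fun x y => (x, y)) (fun k s => (k, s)) (coords.getD i (0,0)) :=
      pvApredEq coords (fun x y => (x, y)) (fun k s => (k, s)) pvInv1 i A1 B1 hp1 hw1 hone
    have hm1s : ((B1.filter (fun t => decide ((coords.getD t (0,0)).1 = (coords.getD i (0,0)).1))).head?).map (fun t => coords.getD t (0,0))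
        = pvSuccC coords (fun x y => (x, y)) (fun k s => (k, s)) (coords.getD i (0,0)) :=
      pvAsuccEq coords (fun x y => (x, y)) (fun k s => (k, s)) pvInv1 i A1 B1 hp1 hw1 hone
    have hB1 : ((pvSteps (PySem.Dict.counter coords) (fun x y => (x, y)) (fun k s => (k, s)))).getD (coords.getD i (0,0)) (none, none)
        = (((A1.filter (fun t => decide ((coords.getD t (0,0)).1 = (coords.getD i (0,0)).1))).getLast?).map (fun t => coords.getD t (0,0)), ((B1.filter (fun t => decide ((coords.getD t (0,0)).1 = (coords.getD i (0,0)).1))).head?).map (fun t => coords.getD t (0,0))) := by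
      rw [pvSteps_getD coords (fun x y => (x, y)) (fun k s => (k, s)) pvKu1 pvInv1 _ hCmem, ← hm1p, ← hm1s]
    have e1 : (!(pvSkipA (pvMarkA coords (A1 ++ i :: B1) (A2 ++ i :: B2) (A3 ++ i :: B3) (A4 ++ i :: B4)) (((A1.filter (fun t => decide ((coords.getD t (0,0)).1 = (coords.getD i (0,0)).1))).getLast?).toList ++ ((B1.filter (fun t => decide ((coords.getD t (0,0)).1 = (coords.getD i (0,0)).1))).head?).toList)))
        = pvAlive (pvMarked (PySem.Dict.counter coords) (pvSteps (PySem.Dict.counter coords) (fun x y => (x, y)) (fun k s => (k, s))) (pvSteps (PySem.Dict.counter coords) (fun x y => (y, x)) (fun k s => (s, k))) (pvSteps (PySem.Dict.counter coords) (fun x y => (x + y, x)) (fun k s => (s, k - s))) (pvSteps (PySem.Dict.counter coords) (fun x y => (y - x, x)) (fun k s => (s, k + s)))) (pvSteps (PySem.Dict.counter coords) (fun x y => (x, y)) (fun k s => (k, s))) (coords.getD i (0,0)) := by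
      apply pvAliveCase _ _ _ _ _ _ _ hB1
      intro t ht
      have htn : t < n := by
        rcases ht with ht | ht
        · have htF := List.mem_of_getLast? ht
          exact hmemn1 t (List.mem_append_left _ (List.mem_filter.mp htF).1)
        · have htF := List.mem_of_mem_head? ht
          exact hmemn1 t (List.mem_append_right _ (List.mem_cons_of_mem _ (List.mem_filter.mp htF).1))
      exact pvMarkEq coords _ _ _ _ hp1 hp2 hp3 hp4 hw1 hw2 hw3 hw4 t htn
    have hm2p : ((A2.filter (fun t => decide ((coords.getD t (0,0)).2 = (coords.getD i (0,0)).2))).getLast?).map (fun t => coords.getD t (0,0))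
        = pvPredC coords (fun x y => (y, x)) (fun k s => (s, k)) (coords.getD i (0,0)) :=
      pvApredEq coords (fun x y => (y, x)) (fun k s => (s, k)) pvInv2 i A2 B2 hp2 hw2 hone
    have hm2s : ((B2.filter (fun t => decide ((coords.getD t (0,0)).2 = (coords.getD i (0,0)).2))).head?).map (fun t => coords.getD t (0,0))
        = pvSuccC coords (fun x y => (y, x)) (fun k s => (s, k)) (coords.getD i (0,0)) :=
      pvAsuccEq coords (fun x y => (y, x)) (fun k s => (s, k)) pvInv2 i A2 B2 hp2 hw2 hone
    have hB2 : ((pvSteps (PySem.Dict.counter coords) (fun x y => (y, x)) (fun k s => (s, k)))).getD (coords.getD i (0,0)) (none, none)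
        = (((A2.filter (fun t => decide ((coords.getD t (0,0)).2 = (coords.getD i (0,0)).2))).getLast?).map (fun t => coords.getD t (0,0)), ((B2.filter (fun t => decide ((coords.getD t (0,0)).2 = (coords.getD i (0,0)).2))).head?).map (fun t => coords.getD t (0,0))) := by
      rw [pvSteps_getD coords (fun x y => (y, x)) (fun k s => (s, k)) pvKu2 pvInv2 _ hCmem, ← hm2p, ← hm2s]
    have e2 : (!(pvSkipA (pvMarkA coords (A1 ++ i :: B1) (A2 ++ i :: B2) (A3 ++ i :: B3) (A4 ++ i :: B4)) (((A2.filter (fun t => decide ((coords.getD t (0,0)).2 = (coords.getD i (0,0)).2))).getLast?).toList ++ ((B2.filter (fun t => decide ((coords.getD t (0,0)).2 = (coords.getD i (0,0)).2))).head?).toList)))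
        = pvAlive (pvMarked (PySem.Dict.counter coords) (pvSteps (PySem.Dict.counter coords) (fun x y => (x, y)) (fun k s => (k, s))) (pvSteps (PySem.Dict.counter coords) (fun x y => (y, x)) (fun k s => (s, k))) (pvSteps (PySem.Dict.counter coords) (fun x y => (x + y, x)) (fun k s => (s, k - s))) (pvSteps (PySem.Dict.counter coords) (fun x y => (y - x, x)) (fun k s => (s, k + s)))) (pvSteps (PySem.Dict.counter coords) (fun x y => (y, x)) (fun k s => (s, k))) (coords.getD i (0,0)) := by
      apply pvAliveCase _ _ _ _ _ _ _ hB2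
      intro t ht
      have htn : t < n := by
        rcases ht with ht | ht
        · have htF := List.mem_of_getLast? ht
          exact hmemn2 t (List.mem_append_left _ (List.mem_filter.mp htF).1)
        · have htF := List.mem_of_mem_head? ht
          exact hmemn2 t (List.mem_append_right _ (List.mem_cons_of_mem _ (List.mem_filter.mp htF).1))
      exact pvMarkEq coords _ _ _ _ hp1 hp2 hp3 hp4 hw1 hw2 hw3 hw4 t htn
    have hm3p : ((A3.filter (fun t => decide ((coords.getD t (0,0)).1 + (coords.getD t (0,0)).2 = (coords.getD i (0,0)).1 + (coords.getD i (0,0)).2))).getLast?).map (fun t => coords.getD t (0,0))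
        = pvPredC coords (fun x y => (x + y, x)) (fun k s => (s, k - s)) (coords.getD i (0,0)) :=
      pvApredEq coords (fun x y => (x + y, x)) (fun k s => (s, k - s)) pvInv3 i A3 B3 hp3 hw3 hone
    have hm3s : ((B3.filter (fun t => decide ((coords.getD t (0,0)).1 + (coords.getD t (0,0)).2 = (coords.getD i (0,0)).1 + (coords.getD i (0,0)).2))).head?).map (fun t => coords.getD t (0,0))
        = pvSuccC coords (fun x y => (x + y, x)) (fun k s => (s, k - s)) (coords.getD i (0,0)) :=
      pvAsuccEq coords (fun x y => (x + y, x)) (fun k s => (s, k - s)) pvInv3 i A3 B3 hp3 hw3 hone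
    have hB3 : ((pvSteps (PySem.Dict.counter coords) (fun x y => (x + y, x)) (fun k s => (s, k - s)))).getD (coords.getD i (0,0)) (none, none)
        = (((A3.filter (fun t => decide ((coords.getD t (0,0)).1 + (coords.getD t (0,0)).2 = (coords.getD i (0,0)).1 + (coords.getD i (0,0)).2))).getLast?).map (fun t => coords.getD t (0,0)), ((B3.filter (fun t => decide ((coords.getD t (0,0)).1 + (coords.getD t (0,0)).2 = (coords.getD i (0,0)).1 + (coords.getD i (0,0)).2))).head?).map (fun t => coords.getD t (0,0))) := by
      rw [pvSteps_getD coords (fun x y => (x + y, x)) (fun k s => (s, k - s)) pvKu3 pvInv3 _ hCmem, ← hm3p, ← hm3s]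
    have e3 : (!(pvSkipA (pvMarkA coords (A1 ++ i :: B1) (A2 ++ i :: B2) (A3 ++ i :: B3) (A4 ++ i :: B4)) (((A3.filter (fun t => decide ((coords.getD t (0,0)).1 + (coords.getD t (0,0)).2 = (coords.getD i (0,0)).1 + (coords.getD i (0,0)).2))).getLast?).toList ++ ((B3.filter (fun t => decide ((coords.getD t (0,0)).1 + (coords.getD t (0,0)).2 = (coords.getD i (0,0)).1 + (coords.getD i (0,0)).2))).head?).toList)))
        = pvAlive (pvMarked (PySem.Dict.counter coords) (pvSteps (PySem.Dict.counter coords) (fun x y => (x, y)) (fun k s => (k, s))) (pvSteps (PySem.Dict.counter coords) (fun x y => (y, x)) (fun k s => (s, k))) (pvSteps (PySem.Dict.counter coords) (fun x y => (x + y, x)) (fun k s => (s, k - s))) (pvSteps (PySem.Dict.counter coords) (fun x y => (y - x, x)) (fun k s => (s, k + s)))) (pvSteps (PySem.Dict.counter coords) (fun x y => (x + y, x)) (fun k s => (s, k - s))) (coords.getD i (0,0)) := by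
      apply pvAliveCase _ _ _ _ _ _ _ hB3
      intro t ht
      have htn : t < n := by
        rcases ht with ht | ht
        · have htF := List.mem_of_getLast? ht
          exact hmemn3 t (List.mem_append_left _ (List.mem_filter.mp htF).1)
        · have htF := List.mem_of_mem_head? ht
          exact hmemn3 t (List.mem_append_right _ (List.mem_cons_of_mem _ (List.mem_filter.mp htF).1))
      exact pvMarkEq coords _ _ _ _ hp1 hp2 hp3 hp4 hw1 hw2 hw3 hw4 t htn
    have hm4p : ((A4.filter (fun t => decide ((coords.getD t (0,0)).2 - (coords.getD t (0,0)).1 = (coords.getD i (0,0)).2 - (coords.getD i (0,0)).1))).getLast?).map (fun t => coords.getD t (0,0))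
        = pvPredC coords (fun x y => (y - x, x)) (fun k s => (s, k + s)) (coords.getD i (0,0)) :=
      pvApredEq coords (fun x y => (y - x, x)) (fun k s => (s, k + s)) pvInv4 i A4 B4 hp4 hw4 hone
    have hm4s : ((B4.filter (fun t => decide ((coords.getD t (0,0)).2 - (coords.getD t (0,0)).1 = (coords.getD i (0,0)).2 - (coords.getD i (0,0)).1))).head?).map (fun t => coords.getD t (0,0))
        = pvSuccC coords (fun x y => (y - x, x)) (fun k s => (s, k + s)) (coords.getD i (0,0)) :=
      pvAsuccEq coords (fun x y => (y - x, x)) (fun k s => (s, k + s)) pvInv4 i A4 B4 hp4 hw4 hone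
    have hB4 : ((pvSteps (PySem.Dict.counter coords) (fun x y => (y - x, x)) (fun k s => (s, k + s)))).getD (coords.getD i (0,0)) (none, none)
        = (((A4.filter (fun t => decide ((coords.getD t (0,0)).2 - (coords.getD t (0,0)).1 = (coords.getD i (0,0)).2 - (coords.getD i (0,0)).1))).getLast?).map (fun t => coords.getD t (0,0)), ((B4.filter (fun t => decide ((coords.getD t (0,0)).2 - (coords.getD t (0,0)).1 = (coords.getD i (0,0)).2 - (coords.getD i (0,0)).1))).head?).map (fun t => coords.getD t (0,0))) := by
      rw [pvSteps_getD coords (fun x y => (y - x, x)) (fun k s => (s, k + s)) pvKu4 pvInv4 _ hCmem, ← hm4p, ← hm4s]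
    have e4 : (!(pvSkipA (pvMarkA coords (A1 ++ i :: B1) (A2 ++ i :: B2) (A3 ++ i :: B3) (A4 ++ i :: B4)) (((A4.filter (fun t => decide ((coords.getD t (0,0)).2 - (coords.getD t (0,0)).1 = (coords.getD i (0,0)).2 - (coords.getD i (0,0)).1))).getLast?).toList ++ ((B4.filter (fun t => decide ((coords.getD t (0,0)).2 - (coords.getD t (0,0)).1 = (coords.getD i (0,0)).2 - (coords.getD i (0,0)).1))).head?).toList)))
        = pvAlive (pvMarked (PySem.Dict.counter coords) (pvSteps (PySem.Dict.counter coords) (fun x y => (x, y)) (fun k s => (k, s))) (pvSteps (PySem.Dict.counter coords) (fun x y => (y, x)) (fun k s => (s, k))) (pvSteps (PySem.Dict.counter coords) (fun x y => (x + y, x)) (fun k s => (s, k - s))) (pvSteps (PySem.Dict.counter coords) (fun x y => (y - x, x)) (fun k s => (s, k + s)))) (pvSteps (PySem.Dict.counter coords) (fun x y => (y - x, x)) (fun k s => (s, k + s))) (coords.getD i (0,0)) := by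
      apply pvAliveCase _ _ _ _ _ _ _ hB4
      intro t ht
      have htn : t < n := by
        rcases ht with ht | ht
        · have htF := List.mem_of_getLast? ht
          exact hmemn4 t (List.mem_append_left _ (List.mem_filter.mp htF).1)
        · have htF := List.mem_of_mem_head? ht
          exact hmemn4 t (List.mem_append_right _ (List.mem_cons_of_mem _ (List.mem_filter.mp htF).1))
      exact pvMarkEq coords _ _ _ _ hp1 hp2 hp3 hp4 hw1 hw2 hw3 hw4 t htn
    rw [e1, e2, e3, e4]
    have hdecf : decide (((coords.count (coords.getD i (0,0)) : Int)) > 1) = false := by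
      simp only [decide_eq_false_iff_not]
      intro h
      exact hdup (by exact_mod_cast h)
    rw [hdecf]
    simp

-- ===== VERDICT (by name: the statement is the Claim_ definition above) =====
theorem doomed_gambit_spec : Claim_equal_doomed_gambit := by
  intro coords _
  unfold Spec_doomed_gambit
  exact pvMain coords
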